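-- pv_equiv track=rewrite | github.com/b72u68/aoc-2022 | day22/day22.py | part1
-- ===== SOURCE A (Python) =====
-- import copy
--
-- def part1(data):
--     board, path = copy.deepcopy(data)
--     moves = [(1, 0), (0, 1), (-1, 0), (0, -1)]
--     moveidx = 0
--     curcoord = (0, 0)
--     for y in range(len(board)):
--         found = False
--         for x in range(len(board[y])):
--             if board[y][x] == ".":
--                 curcoord = (x, y)
--                 found = True
--                 break
--         if found:
--             break
--     for p in path:
--         if p.isnumeric():
--             dx, dy = moves[moveidx]
--             for _ in range(int(p)):
--                 x, y = curcoord
--                 nx = (x + dx) % len(board[y])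
--                 ny = (y + dy) % len(board)
--                 while board[ny][nx] == " " and dx:
--                     nx = (nx + dx) % len(board[y])
--                 while board[ny][nx] == " " and dy:
--                     ny = (ny + dy) % len(board)
--                 if board[ny][nx] == ".":
--                     curcoord = (nx, ny)
--                 elif board[ny][nx] == "#":
--                     break
--         elif p == "L":
--             moveidx = (moveidx - 1) % len(moves)
--         else:
--             moveidx = (moveidx + 1) % len(moves)
--     return 1000 * (curcoord[1] + 1) + 4 * (curcoord[0] + 1) + moveidx
-- ===== SOURCE B (Python) =====
-- def _move(get, cells, stp, pos, n):
--     # walk along the precomputed list of non-space positions of this row/column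
--     m = len(cells)
--     i = sum(1 for c in cells if c < pos)
--     if all(get(c) == '.' for c in cells):
--         return cells[(i + stp * n) % m]
--     for _ in range(n):
--         j = (i + stp) % m
--         if get(cells[j]) != '.':
--             break
--         i = j
--         pos = cells[j]
--     return pos
--
--
-- def part1(data):
--     board, path = data
--     h = len(board)
--     rows = [[x for x, ch in enumerate(row) if ch != ' '] for row in board]
--     w = max(map(len, board), default=0)
--     cols = [[y for y in range(h) if x < len(board[y]) and board[y][x] != ' ']
--             for x in range(w)]
--     starts = [(x, y) for y, row in enumerate(board)
--               for x, ch in enumerate(row) if ch == '.']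
--     cur = starts[0] if starts else (0, 0)
--     facing = 0
--     for p in path:
--         if p.isnumeric():
--             n = int(p)
--             if n > 0:
--                 x, y = cur
--                 if facing % 2 == 0:
--                     stp = 1 if facing == 0 else -1
--                     cur = (_move(lambda c: board[y][c], rows[y], stp, x, n), y)
--                 else:
--                     stp = 1 if facing == 1 else -1
--                     cur = (x, _move(lambda c: board[c][x], cols[x], stp, y, n))
--         elif p == 'L':
--             facing = (facing - 1) % 4
--         else:
--             facing = (facing + 1) % 4
--     return 1000 * (cur[1] + 1) + 4 * (cur[0] + 1) + facing
-- ===== Notes on version B (the rewrite author's own statement) =====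
-- stated objective: alternative
-- what changed: B precomputes, once, the sorted list of non-space positions of every row and column, then executes each numeric move by walking index-wise along that compressed list (with a closed-form modular jump when the line contains no blocking cell), instead of A's per-step modular wrap-around scan over raw grid characters that re-skips the space gaps on every single step.
-- outside the precondition, e.g. on part1((['#', '..'], ['R', '1'])): A returns 2005, B returns 2005
import Mathlib
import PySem

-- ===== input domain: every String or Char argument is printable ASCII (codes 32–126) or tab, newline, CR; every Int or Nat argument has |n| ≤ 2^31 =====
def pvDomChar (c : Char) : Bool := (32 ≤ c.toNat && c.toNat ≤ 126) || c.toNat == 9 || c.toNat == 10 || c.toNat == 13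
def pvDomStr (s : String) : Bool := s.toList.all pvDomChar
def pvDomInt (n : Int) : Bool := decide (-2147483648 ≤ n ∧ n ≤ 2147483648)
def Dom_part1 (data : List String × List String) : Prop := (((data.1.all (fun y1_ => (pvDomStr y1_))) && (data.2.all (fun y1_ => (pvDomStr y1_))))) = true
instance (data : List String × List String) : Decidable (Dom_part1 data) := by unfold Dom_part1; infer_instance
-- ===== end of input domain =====

-- B replaces A's per-step space-skipping wrap scans by per-row/column lists of the
-- non-space positions built once, walking (or jumping, on wall-free lines) along them.

-- ===== PORT A =====

-- board[y][x]; Python raises IndexError outside the board — those inputs are outside Pre_,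
-- the port returns the junk char '!' there.
def pvCellA (board : List String) (y x : Int) : Char :=
  match PySem.List.pyGet? board y with
  | some r => (PySem.Str.pyGet? r x).getD '!'
  | none => '!'

-- len(board[y]) (0 where Python raises IndexError; outside Pre_)
def pvRowLenA (board : List String) (y : Int) : Int :=
  match PySem.List.pyGet? board y with
  | some r => PySem.Str.len r
  | none => 0

-- 'while f(s) == " " and d: s = (s + d) % L' — fuelled; inside Pre_ a non-space is found
-- within L steps, so fuel L.toNat is exact (Python loops forever only outside Pre_).
def pvScanA (f : Int → Char) (L d : Int) : Nat → Int → Int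
  | 0, s => s
  | fuel + 1, s => if f s = ' ' ∧ d ≠ 0 then pvScanA f L d fuel (PySem.Int.mod (s + d) L) else s

-- one iteration of A's inner 'for _ in range(int(p))' body: .1 = continue? (false = break)
def pvStepA (board : List String) (dx dy : Int) (c : Int × Int) : Bool × (Int × Int) :=
  let w := pvRowLenA board c.2
  let h : Int := (board.length : Int)
  if w = 0 ∨ h = 0 then (false, c)  -- Python raises (ZeroDivision/IndexError) here; outside Pre_
  else
    let nx0 := PySem.Int.mod (c.1 + dx) w
    let ny0 := PySem.Int.mod (c.2 + dy) h
    let nx := pvScanA (fun t => pvCellA board ny0 t) w dx w.toNat nx0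
    let ny := pvScanA (fun t => pvCellA board t nx) h dy h.toNat ny0
    let ch := pvCellA board ny nx
    if ch = '.' then (true, (nx, ny))
    else if ch = '#' then (false, c)
    else (true, c)

def pvRunA (board : List String) (dx dy : Int) : Nat → Int × Int → Int × Int
  | 0, c => c
  | n + 1, c =>
    match pvStepA board dx dy c with
    | (true, c') => pvRunA board dx dy n c'
    | (false, c') => c'

-- the inner 'for x in range(len(board[y])): if board[y][x] == ".": … break'
def pvStartRowA : List Char → Int → Option Int
  | [], _ => none
  | c :: cs, x => if c = '.' then some x else pvStartRowA cs (x + 1)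

-- the outer 'for y in range(len(board)): … if found: break'
def pvStartA : List String → Int → Int × Int
  | [], _ => (0, 0)
  | r :: rest, y =>
    match pvStartRowA r.toList 0 with
    | some x => (x, y)
    | none => pvStartA rest (y + 1)

def pvMovesA : List (Int × Int) := [(1, 0), (0, 1), (-1, 0), (0, -1)]

def part1 (data : List String × List String) : Int :=
  let board := data.1
  -- p.isnumeric() = Str.strIsdigit on the printable-ASCII domain (exact here)
  let res := data.2.foldl (fun (st : Int × (Int × Int)) p =>
    if PySem.Str.strIsdigit p then
      let mv := (PySem.List.pyGet? pvMovesA st.1).getD (0, 0)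
      (st.1, pvRunA board mv.1 mv.2 ((PySem.Int.ofStr? p).getD 0).toNat st.2)
    else if p = "L" then (PySem.Int.mod (st.1 - 1) 4, st.2)
    else (PySem.Int.mod (st.1 + 1) 4, st.2)) (0, pvStartA board 0)
  1000 * (res.2.2 + 1) + 4 * (res.2.1 + 1) + res.1

-- ===== PORT B =====

def pvCellB (board : List String) (y x : Int) : Char :=
  match PySem.List.pyGet? board y with
  | some r => (PySem.Str.pyGet? r x).getD '!'
  | none => '!'

def pvRowLenB (board : List String) (y : Int) : Int :=
  match PySem.List.pyGet? board y with
  | some r => PySem.Str.len r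
  | none => 0

-- the 'for _ in range(n): j = (i + stp) % m; …' loop of _move
def pvWalkB (get : Int → Char) (cells : List Int) (stp : Int) : Nat → Nat → Int → Int
  | 0, _, pos => pos
  | n + 1, i, pos =>
    let j := (PySem.Int.mod ((i : Int) + stp) (cells.length : Int)).toNat
    let c := cells.getD j 0
    if get c ≠ '.' then pos
    else pvWalkB get cells stp n j c

-- _move(get, cells, stp, pos, n); 'sum(1 for c in cells if c < pos)' is the countP
def pvMoveB (get : Int → Char) (cells : List Int) (stp pos : Int) (n : Int) : Int :=
  let i := cells.countP (fun c => decide (c < pos))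
  if cells.all (fun c => get c = '.') then
    cells.getD ((PySem.Int.mod ((i : Int) + stp * n) (cells.length : Int)).toNat) 0
  else
    pvWalkB get cells stp n.toNat i pos

-- rows = [[x for x, ch in enumerate(row) if ch != ' '] for row in board]
def pvRowsB (board : List String) : List (List Int) :=
  board.map (fun r => (PySem.List.enumerate r.toList 0).filterMap
    (fun q => if q.2 ≠ ' ' then some q.1 else none))

-- cols = [[y for y in range(h) if x < len(board[y]) and board[y][x] != ' '] for x in range(w)]
def pvColsB (board : List String) (w : Int) : List (List Int) :=
  (PySem.List.pyRange 0 w 1).map (fun x =>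
    (PySem.List.pyRange 0 (board.length : Int) 1).filterMap
      (fun y => if x < pvRowLenB board y ∧ pvCellB board y x ≠ ' ' then some y else none))

-- starts = [(x, y) …]; cur = starts[0] if starts else (0, 0)
def pvStartB (board : List String) : Int × Int :=
  ((PySem.List.enumerate board 0).flatMap (fun q =>
    (PySem.List.enumerate q.2.toList 0).filterMap
      (fun r => if r.2 = '.' then some (r.1, q.1) else none))).headD (0, 0)

def part1_alt (data : List String × List String) : Int :=
  let board := data.1
  let rows := pvRowsB board
  -- w = max(map(len, board), default=0)
  let w := PySem.List.maxD (board.map PySem.Str.len) (fun v => v) 0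
  let cols := pvColsB board w
  let res := data.2.foldl (fun (st : Int × (Int × Int)) p =>
    if PySem.Str.strIsdigit p then
      let n := (PySem.Int.ofStr? p).getD 0
      if 0 < n then
        if PySem.Int.mod st.1 2 = 0 then
          let stp : Int := if st.1 = 0 then 1 else -1
          (st.1, (pvMoveB (fun c => pvCellB board st.2.2 c) (rows.getD st.2.2.toNat []) stp st.2.1 n, st.2.2))
        else
          let stp : Int := if st.1 = 1 then 1 else -1
          (st.1, (st.2.1, pvMoveB (fun c => pvCellB board c st.2.1) (cols.getD st.2.1.toNat []) stp st.2.2 n))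
      else st
    else if p = "L" then (PySem.Int.mod (st.1 - 1) 4, st.2)
    else (PySem.Int.mod (st.1 + 1) 4, st.2)) (0, pvStartB board)
  1000 * (res.2.2 + 1) + 4 * (res.2.1 + 1) + res.1

-- ===== PRECONDITION & SPEC =====

-- an effective move token: a digit string of value ≥ 1
def pvNum1 (p : String) : Prop := PySem.Str.strIsdigit p = true ∧ 1 ≤ (PySem.Int.ofStr? p).getD 0

-- number of turn (non-digit) tokens in a list; its parity at a token decides the move's axis
def pvCntNN (l : List String) : Nat := l.countP (fun p => !PySem.Str.strIsdigit p)

-- 'the path contains an effective move token whose facing parity (c + #turns before it) is b'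
-- (b = 0: a horizontal move is executed; b = 1: a vertical move is executed)
def pvTokAt (b c : Nat) (l : List String) : Prop :=
  ∃ i ∈ List.range l.length, pvNum1 (l.getD i "") ∧ (c + pvCntNN (l.take i)) % 2 = b

def pvNoDot (board : List String) : Prop := ∀ r ∈ board, '.' ∉ r.toList

def pvRow0OK (board : List String) : Prop :=
  ((board.headD "").toList.any (fun c => !(c == ' '))) = true

def pvCol0OK (board : List String) : Prop :=
  (board.any (fun r => !(r.toList.headD ' ' == ' '))) = true

-- Pre_ excludes only inputs on which A raises (IndexError / ZeroDivisionError), loops forever,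
-- or — when the path executes a vertical move — non-rectangular / zero-width boards: on a ragged
-- board a vertical step may index past a short row and raise; this rectangularity requirement is a
-- sufficient condition, so a few ragged boards whose walk happens to avoid short rows (on which A
-- returns, and B returns the same value) are excluded too — see the cites.  Ragged boards with
-- purely horizontal movement are fully inside Pre_.
def Pre_part1 (data : List String × List String) : Prop :=
  (∃ p ∈ data.2, pvNum1 p) →
    ((pvTokAt 1 0 data.2 →
        (∀ r ∈ data.1, r.toList.length = (data.1.headD "").toList.length) ∧
        0 < (data.1.headD "").toList.length) ∧
     (pvNoDot data.1 →
        (pvTokAt 0 0 data.2 → pvRow0OK data.1) ∧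
        (pvTokAt 1 0 data.2 → pvCol0OK data.1)))

instance (data : List String × List String) : Decidable (Pre_part1 data) := by
  unfold Pre_part1 pvTokAt pvNum1 pvNoDot pvRow0OK pvCol0OK; infer_instance

def pvWitness_part1 : (List String × List String) :=
  (["..#", "#..", "..."], ["2", "R", "1", "L", "3"])

def Spec_part1 (data : List String × List String) (out : Int) : Prop := out = part1_alt data
instance (data : List String × List String) (out : Int) : Decidable (Spec_part1 data out) := by unfold Spec_part1; infer_instance

-- ===== CLAIM (what is proved, stated in full; the proofs are below) =====
def Claim_equal_part1 : Prop := ∀ (data : List String × List String), Dom_part1 data → Pre_part1 data → Spec_part1 data (part1 data)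

-- ===== LEMMAS AND PROOFS =====

-- proof-side abbreviations
def pvW (board : List String) : Int := ((board.headD "").toList.length : Int)

-- smallest element of cells that is ≥ s, else the smallest element (cyclic successor base)
def pvNext (cells : List Int) (s : Int) : Int :=
  (cells.find? (fun c => decide (s ≤ c))).getD (cells.headD 0)

-- largest element of cells that is ≤ s, else the largest element
def pvPrev (cells : List Int) (s : Int) : Int :=
  (cells.reverse.find? (fun c => decide (c ≤ s))).getD (cells.reverse.headD 0)

-- A's per-move walk along one line (row or column), abstracted
def pvLineA (f : Int → Char) (L d : Int) : Nat → Int → Int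
  | 0, p => p
  | n + 1, p =>
    let s := pvScanA f L d L.toNat (PySem.Int.mod (p + d) L)
    if f s = '.' then pvLineA f L d n s else p

-- the walker's state invariant through the path fold
def pvInv (board : List String) (st : Int × (Int × Int)) : Prop :=
  (0 ≤ st.1 ∧ st.1 < 4) ∧ (0 ≤ st.2.1 ∧ st.2.1 < pvRowLenA board st.2.2) ∧
  (0 ≤ st.2.2 ∧ st.2.2 < (board.length : Int)) ∧
  (pvCellA board st.2.2 st.2.1 = '.' ∨ (pvNoDot board ∧ st.2.1 = 0 ∧ st.2.2 = 0))

-- line package: f is the char along the line, L its length, cells its non-space positions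
def pvLineOK (f : Int → Char) (L : Int) (cells : List Int) : Prop :=
  0 < L ∧ cells.Pairwise (· < ·) ∧ cells ≠ [] ∧
  (∀ t, t ∈ cells ↔ 0 ≤ t ∧ t < L ∧ f t ≠ ' ')

-- ---------- generic sorted-list facts ----------

theorem pvCountP_getElem : ∀ (cells : List Int), cells.Pairwise (· < ·) →
    ∀ j (hj : j < cells.length), cells.countP (fun c => decide (c < cells[j])) = j := by
  intro cells
  induction cells with
  | nil => intro _ j hj; simp at hj
  | cons a tl ih =>
    intro hs j hj
    rw [List.pairwise_cons] at hs
    obtain ⟨ha, htl⟩ := hs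
    cases j with
    | zero =>
      simp only [List.getElem_cons_zero]
      simp
      intro c hc
      exact le_of_lt (ha c hc)
    | succ k =>
      have hk : k < tl.length := by simpa using hj
      have hlt : a < tl[k] := ha _ (List.getElem_mem _)
      have hih := ih htl k hk
      simp only [List.getElem_cons_succ, List.countP_cons]
      simp only [hlt, decide_true, if_true]
      exact congrArg (· + 1) hih

theorem pvFind?_ge : ∀ (cells : List Int), cells.Pairwise (· < ·) → ∀ (a c : Int),
    c ∈ cells → a ≤ c → (∀ c' ∈ cells, c' < c → c' < a) →
    cells.find? (fun x => decide (a ≤ x)) = some c := by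
  intro cells
  induction cells with
  | nil => intro _ a c hc; simp at hc
  | cons b tl ih =>
    intro hs a c hc h1 h2
    rw [List.pairwise_cons] at hs
    obtain ⟨hb, htl⟩ := hs
    rcases List.mem_cons.1 hc with rfl | hctl
    · simp [h1]
    · have hbc : b < c := hb c hctl
      have hba : b < a := h2 b List.mem_cons_self hbc
      have hdec : (decide (a ≤ b) : Bool) = false := by simp; omega
      simp only [List.find?_cons, hdec]
      exact ih htl a c hctl h1 (fun c' hc' => h2 c' (List.mem_cons_of_mem _ hc'))

theorem pvFind?_le_desc : ∀ (l : List Int), l.Pairwise (· > ·) → ∀ (a c : Int),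
    c ∈ l → c ≤ a → (∀ c' ∈ l, c' ≤ a → c' ≤ c) →
    l.find? (fun x => decide (x ≤ a)) = some c := by
  intro l
  induction l with
  | nil => intro _ a c hc; simp at hc
  | cons b tl ih =>
    intro hs a c hc h1 h2
    rw [List.pairwise_cons] at hs
    obtain ⟨hb, htl⟩ := hs
    rcases List.mem_cons.1 hc with rfl | hctl
    · simp [h1]
    · have hbc : b > c := hb c hctl
      have hba : ¬ (b ≤ a) := fun hle => by have := h2 b List.mem_cons_self hle; omega
      have hdec : (decide (b ≤ a) : Bool) = false := by simp; omega
      simp only [List.find?_cons, hdec]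
      exact ih htl a c hctl h1 (fun c' hc' => h2 c' (List.mem_cons_of_mem _ hc'))

theorem pvFind?_le_rev (cells : List Int) (hs : cells.Pairwise (· < ·)) (a c : Int)
    (hc : c ∈ cells) (h1 : c ≤ a) (h2 : ∀ c' ∈ cells, c' ≤ a → c' ≤ c) :
    cells.reverse.find? (fun x => decide (x ≤ a)) = some c :=
  pvFind?_le_desc cells.reverse (by rw [List.pairwise_reverse]; exact hs) a c
    (by simpa using hc) h1 (fun c' hm => h2 c' (by simpa using hm))

-- ---------- cyclic successor/predecessor facts ----------

theorem pvFind?_congr : ∀ (l : List Int) (p q : Int → Bool), (∀ x ∈ l, p x = q x) →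
    l.find? p = l.find? q := by
  intro l
  induction l with
  | nil => intro p q _; rfl
  | cons b tl ih =>
    intro p q h
    have hb := h b List.mem_cons_self
    simp only [List.find?_cons, hb]
    cases q b
    · exact ih p q (fun x hx => h x (List.mem_cons_of_mem _ hx))
    · rfl

theorem pvHeadD_mem (cells : List Int) (hne : cells ≠ []) : cells.headD 0 ∈ cells := by
  cases cells with
  | nil => exact absurd rfl hne
  | cons a tl => simp

theorem pvHeadD_min (cells : List Int) (hs : cells.Pairwise (· < ·)) :
    ∀ c ∈ cells, cells.headD 0 ≤ c := by
  cases cells with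
  | nil => intro c hc; simp at hc
  | cons b tl =>
    intro c hc
    rw [List.pairwise_cons] at hs
    rcases List.mem_cons.1 hc with rfl | h
    · simp
    · simpa using le_of_lt (hs.1 c h)

theorem pvHeadD_max_desc (l : List Int) (hs : l.Pairwise (· > ·)) :
    ∀ c ∈ l, c ≤ l.headD 0 := by
  cases l with
  | nil => intro c hc; simp at hc
  | cons b tl =>
    intro c hc
    rw [List.pairwise_cons] at hs
    rcases List.mem_cons.1 hc with rfl | h
    · simp
    · simpa using le_of_lt (hs.1 c h)

theorem pvNext_mem (cells : List Int) (s : Int) (hne : cells ≠ []) : pvNext cells s ∈ cells := by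
  unfold pvNext
  cases hf : cells.find? (fun c => decide (s ≤ c)) with
  | some c => exact List.mem_of_find?_eq_some hf
  | none => exact pvHeadD_mem cells hne

theorem pvPrev_mem (cells : List Int) (s : Int) (hne : cells ≠ []) : pvPrev cells s ∈ cells := by
  unfold pvPrev
  cases hf : cells.reverse.find? (fun c => decide (c ≤ s)) with
  | some c => simpa using List.mem_of_find?_eq_some hf
  | none =>
    have : cells.reverse ≠ [] := by simpa using hne
    simpa using pvHeadD_mem cells.reverse this

theorem pvNext_self (cells : List Int) (hs : cells.Pairwise (· < ·)) (s : Int)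
    (h : s ∈ cells) : pvNext cells s = s := by
  unfold pvNext
  rw [pvFind?_ge cells hs s s h le_rfl (fun c' _ hlt => hlt)]
  rfl

theorem pvPrev_self (cells : List Int) (hs : cells.Pairwise (· < ·)) (s : Int)
    (h : s ∈ cells) : pvPrev cells s = s := by
  unfold pvPrev
  rw [pvFind?_le_rev cells hs s s h le_rfl (fun c' _ hle => hle)]
  rfl

-- the unique-residue characterization of emod used throughout
theorem pvEmodEq (L a r : Int) (_hL : 0 < L) (h : L ∣ (a - r)) (h0 : 0 ≤ r) (h1 : r < L) :
    a % L = r := by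
  obtain ⟨q, hq⟩ := h
  have ha : a = r + L * q := by omega
  rw [ha, Int.add_mul_emod_self_left]
  exact Int.emod_eq_of_lt h0 h1

theorem pvNext_shift (f : Int → Char) (L : Int) (cells : List Int)
    (_hL : 0 < L) (hs : cells.Pairwise (· < ·)) (hne : cells ≠ [])
    (hmem : ∀ t, t ∈ cells ↔ 0 ≤ t ∧ t < L ∧ f t ≠ ' ')
    (s : Int) (hs0 : 0 ≤ s) (hsL : s < L) (hns : s ∉ cells) :
    pvNext cells ((s + 1) % L) = pvNext cells s := by
  by_cases hend : s + 1 < L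
  · have he : (s + 1) % L = s + 1 := Int.emod_eq_of_lt (by omega) hend
    rw [he]
    unfold pvNext
    rw [pvFind?_congr cells _ _ (fun c hc => by
      have hcs : c ≠ s := fun h => hns (h ▸ hc)
      show decide (s + 1 ≤ c) = decide (s ≤ c)
      rw [decide_eq_decide]
      omega)]
  · have he : (s + 1) % L = 0 := by
      have : s + 1 = L := by omega
      rw [this, Int.emod_self]
    rw [he]
    have hhm := pvHeadD_mem cells hne
    have hh0 : 0 ≤ cells.headD 0 := ((hmem _).1 hhm).1
    have hnone : cells.find? (fun c => decide (s ≤ c)) = none := by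
      rw [List.find?_eq_none]
      intro c hc
      have h1 := (hmem c).1 hc
      have h2 : c ≠ s := fun h => hns (h ▸ hc)
      simp; omega
    have hsome : cells.find? (fun c => decide ((0 : Int) ≤ c)) = some (cells.headD 0) := by
      apply pvFind?_ge cells hs 0 _ hhm hh0
      intro c' hc' hlt
      have := pvHeadD_min cells hs c' hc'
      omega
    unfold pvNext
    rw [hnone, hsome]
    rfl

theorem pvPrev_shift (f : Int → Char) (L : Int) (cells : List Int)
    (hL : 0 < L) (hs : cells.Pairwise (· < ·)) (hne : cells ≠ [])
    (hmem : ∀ t, t ∈ cells ↔ 0 ≤ t ∧ t < L ∧ f t ≠ ' ')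
    (s : Int) (hs0 : 0 ≤ s) (hsL : s < L) (hns : s ∉ cells) :
    pvPrev cells ((s - 1) % L) = pvPrev cells s := by
  by_cases hpos : 1 ≤ s
  · have he : (s - 1) % L = s - 1 := Int.emod_eq_of_lt (by omega) (by omega)
    rw [he]
    unfold pvPrev
    rw [pvFind?_congr cells.reverse _ _ (fun c hc => by
      have hcm : c ∈ cells := by simpa using hc
      have hcs : c ≠ s := fun h => hns (h ▸ hcm)
      show decide (c ≤ s - 1) = decide (c ≤ s)
      rw [decide_eq_decide]
      omega)]
  · have hsz : s = 0 := by omega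
    have he : (s - 1) % L = L - 1 := by
      apply pvEmodEq L (s - 1) (L - 1) hL _ (by omega) (by omega)
      exact ⟨-1, by omega⟩
    rw [he, hsz]
    have hrne : cells.reverse ≠ [] := by simpa using hne
    have hds : cells.reverse.Pairwise (· > ·) := by rw [List.pairwise_reverse]; exact hs
    have hhm : cells.reverse.headD 0 ∈ cells := by simpa using pvHeadD_mem cells.reverse hrne
    have hhL : cells.reverse.headD 0 < L := ((hmem _).1 hhm).2.1
    have hnone : cells.reverse.find? (fun c => decide (c ≤ (0 : Int))) = none := by
      rw [List.find?_eq_none]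
      intro c hc
      have hcm : c ∈ cells := by simpa using hc
      have h1 := (hmem c).1 hcm
      have h2 : c ≠ 0 := fun h => hns (by rw [hsz]; exact h ▸ hcm)
      simp; omega
    have hsome : cells.reverse.find? (fun c => decide (c ≤ L - 1))
        = some (cells.reverse.headD 0) := by
      apply pvFind?_le_desc cells.reverse hds (L - 1) _ (pvHeadD_mem cells.reverse hrne)
        (by omega)
      intro c' hc' _
      exact pvHeadD_max_desc cells.reverse hds c' hc'
    unfold pvPrev
    rw [hnone, hsome]
    rfl

-- ---------- the fuelled wrap-scan computes pvNext / pvPrev ----------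

theorem pvScanA_d_zero (f : Int → Char) (L : Int) (fuel : Nat) (s : Int) :
    pvScanA f L 0 fuel s = s := by
  cases fuel <;> simp [pvScanA]

theorem pvScanA_next (f : Int → Char) (L : Int) (cells : List Int)
    (hL : 0 < L) (hs : cells.Pairwise (· < ·)) (hne : cells ≠ [])
    (hmem : ∀ t, t ∈ cells ↔ 0 ≤ t ∧ t < L ∧ f t ≠ ' ') :
    ∀ (fuel : Nat) (s : Int), 0 ≤ s → s < L →
      ((pvNext cells s - s) % L).toNat ≤ fuel →
      pvScanA f L 1 fuel s = pvNext cells s := by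
  intro fuel
  induction fuel with
  | zero =>
    intro s h0 h1 hd
    have hnm := pvNext_mem cells s hne
    have hb := (hmem _).1 hnm
    have hnn : 0 ≤ (pvNext cells s - s) % L := Int.emod_nonneg _ (by omega)
    have hz : (pvNext cells s - s) % L = 0 := by omega
    have hdvd : L ∣ (pvNext cells s - s) := Int.dvd_of_emod_eq_zero hz
    obtain ⟨q, hq⟩ := hdvd
    have : pvNext cells s = s := by
      rcases (by omega : q = 0 ∨ 1 ≤ q ∨ q ≤ -1) with h | h | h <;> nlinarith [hq]
    simp [pvScanA, this]
  | succ fuel ih =>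
    intro s h0 h1 hd
    by_cases hsp : f s = ' '
    · have hns : s ∉ cells := fun hm => ((hmem s).1 hm).2.2 hsp
      have hnm := pvNext_mem cells s hne
      have hnb := (hmem _).1 hnm
      have hne_s : pvNext cells s ≠ s := fun h => hns (h ▸ hnm)
      have hnn : 0 ≤ (pvNext cells s - s) % L := Int.emod_nonneg _ (by omega)
      have hd1 : 1 ≤ (pvNext cells s - s) % L := by
        rcases (by omega : 1 ≤ (pvNext cells s - s) % L ∨ (pvNext cells s - s) % L = 0) with h | h
        · exact h
        · exfalso
          obtain ⟨q, hq⟩ := Int.dvd_of_emod_eq_zero h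
          have : pvNext cells s = s := by
            rcases (by omega : q = 0 ∨ 1 ≤ q ∨ q ≤ -1) with hh | hh | hh <;> nlinarith [hq]
          exact hne_s this
      simp only [pvScanA, hsp, ne_eq, one_ne_zero, not_false_eq_true, and_self, if_true]
      rw [PySem.Int.mod_eq_emod_of_pos hL]
      set r := (pvNext cells s - s) % L with hr
      have hrL : r < L := Int.emod_lt_of_pos _ hL
      obtain ⟨q, hq⟩ : ∃ q, pvNext cells s - s = L * q + r := ⟨(pvNext cells s - s) / L, by
        have := Int.emod_add_mul_ediv (pvNext cells s - s) L; omega⟩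
      have hs'0 : 0 ≤ (s + 1) % L := Int.emod_nonneg _ (by omega)
      have hs'1 : (s + 1) % L < L := Int.emod_lt_of_pos _ hL
      have hshift := pvNext_shift f L cells hL hs hne hmem s h0 h1 hns
      -- distance decreases by one
      have hdist' : (pvNext cells ((s + 1) % L) - (s + 1) % L) % L = r - 1 := by
        rw [hshift]
        by_cases hend : s + 1 < L
        · have he : (s + 1) % L = s + 1 := Int.emod_eq_of_lt (by omega) hend
          rw [he]
          exact pvEmodEq L _ _ hL ⟨q, by omega⟩ (by omega) (by omega)
        · have he : (s + 1) % L = 0 := by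
            have : s + 1 = L := by omega
            rw [this, Int.emod_self]
          rw [he]
          refine pvEmodEq L _ _ hL ⟨q + 1, ?_⟩ (by omega) (by omega)
          have hexp : L * (q + 1) = L * q + L := by ring
          omega
      rw [ih _ hs'0 hs'1 (by omega), hshift]
    · have hin : s ∈ cells := (hmem s).2 ⟨h0, h1, hsp⟩
      simp [pvScanA, hsp, pvNext_self cells hs s hin]

theorem pvScanA_prev (f : Int → Char) (L : Int) (cells : List Int)
    (hL : 0 < L) (hs : cells.Pairwise (· < ·)) (hne : cells ≠ [])
    (hmem : ∀ t, t ∈ cells ↔ 0 ≤ t ∧ t < L ∧ f t ≠ ' ') :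
    ∀ (fuel : Nat) (s : Int), 0 ≤ s → s < L →
      ((s - pvPrev cells s) % L).toNat ≤ fuel →
      pvScanA f L (-1) fuel s = pvPrev cells s := by
  intro fuel
  induction fuel with
  | zero =>
    intro s h0 h1 hd
    have hnm := pvPrev_mem cells s hne
    have hb := (hmem _).1 hnm
    have hnn : 0 ≤ (s - pvPrev cells s) % L := Int.emod_nonneg _ (by omega)
    have hz : (s - pvPrev cells s) % L = 0 := by omega
    obtain ⟨q, hq⟩ := Int.dvd_of_emod_eq_zero hz
    have : pvPrev cells s = s := by
      rcases (by omega : q = 0 ∨ 1 ≤ q ∨ q ≤ -1) with h | h | h <;> nlinarith [hq]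
    simp [pvScanA, this]
  | succ fuel ih =>
    intro s h0 h1 hd
    by_cases hsp : f s = ' '
    · have hns : s ∉ cells := fun hm => ((hmem s).1 hm).2.2 hsp
      have hnm := pvPrev_mem cells s hne
      have hnb := (hmem _).1 hnm
      have hne_s : pvPrev cells s ≠ s := fun h => hns (h ▸ hnm)
      have hnn : 0 ≤ (s - pvPrev cells s) % L := Int.emod_nonneg _ (by omega)
      have hd1 : 1 ≤ (s - pvPrev cells s) % L := by
        rcases (by omega : 1 ≤ (s - pvPrev cells s) % L ∨ (s - pvPrev cells s) % L = 0) with h | h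
        · exact h
        · exfalso
          obtain ⟨q, hq⟩ := Int.dvd_of_emod_eq_zero h
          have : pvPrev cells s = s := by
            rcases (by omega : q = 0 ∨ 1 ≤ q ∨ q ≤ -1) with hh | hh | hh <;> nlinarith [hq]
          exact hne_s this
      simp only [pvScanA, hsp, ne_eq, neg_eq_zero, one_ne_zero, not_false_eq_true, and_self, if_true]
      rw [PySem.Int.mod_eq_emod_of_pos hL]
      have harg : s + (-1) = s - 1 := by ring
      rw [harg]
      set r := (s - pvPrev cells s) % L with hr
      have hrL : r < L := Int.emod_lt_of_pos _ hL
      obtain ⟨q, hq⟩ : ∃ q, s - pvPrev cells s = L * q + r := ⟨(s - pvPrev cells s) / L, by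
        have := Int.emod_add_mul_ediv (s - pvPrev cells s) L; omega⟩
      have hs'0 : 0 ≤ (s - 1) % L := Int.emod_nonneg _ (by omega)
      have hs'1 : (s - 1) % L < L := Int.emod_lt_of_pos _ hL
      have hshift := pvPrev_shift f L cells hL hs hne hmem s h0 h1 hns
      have hdist' : ((s - 1) % L - pvPrev cells ((s - 1) % L)) % L = r - 1 := by
        rw [hshift]
        by_cases hpos : 1 ≤ s
        · have he : (s - 1) % L = s - 1 := Int.emod_eq_of_lt (by omega) (by omega)
          rw [he]
          exact pvEmodEq L _ _ hL ⟨q, by omega⟩ (by omega) (by omega)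
        · have hsz : s = 0 := by omega
          have he : (s - 1) % L = L - 1 := by
            apply pvEmodEq L (s - 1) (L - 1) hL _ (by omega) (by omega)
            exact ⟨-1, by omega⟩
          rw [he]
          refine pvEmodEq L _ _ hL ⟨q + 1, ?_⟩ (by omega) (by omega)
          have hexp : L * (q + 1) = L * q + L := by ring
          omega
      rw [ih _ hs'0 hs'1 (by omega), hshift]
    · have hin : s ∈ cells := (hmem s).2 ⟨h0, h1, hsp⟩
      simp [pvScanA, hsp, pvPrev_self cells hs s hin]

-- ---------- index successor/predecessor on the sorted cell list ----------

theorem pvHeadD_eq_getElem (l : List Int) (h : l ≠ []) :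
    l.headD 0 = l[0]'(List.length_pos_iff.2 h) := by
  cases l with
  | nil => exact absurd rfl h
  | cons a tl => rfl

theorem pvMono_lt (cells : List Int) (hs : cells.Pairwise (· < ·))
    {i j : Nat} (hi : i < cells.length) (hj : j < cells.length) (hij : i < j) :
    cells[i] < cells[j] :=
  List.pairwise_iff_getElem.1 hs i j hi hj hij

theorem pvGetD_succ (f : Int → Char) (L : Int) (cells : List Int)
    (_hL : 0 < L) (hs : cells.Pairwise (· < ·)) (hne : cells ≠ [])
    (hmem : ∀ t, t ∈ cells ↔ 0 ≤ t ∧ t < L ∧ f t ≠ ' ')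
    (j : Nat) (hj : j < cells.length) :
    cells.getD (((j : Int) + 1) % (cells.length : Int)).toNat 0
      = pvNext cells ((cells[j] + 1) % L) := by
  have hm : 0 < cells.length := List.length_pos_iff.2 hne
  have hpb := (hmem cells[j]).1 (List.getElem_mem hj)
  by_cases hlast : j + 1 < cells.length
  · have hidx : ((j : Int) + 1) % (cells.length : Int) = (j : Int) + 1 :=
      Int.emod_eq_of_lt (by omega) (by exact_mod_cast hlast)
    have htb := (hmem cells[j + 1]).1 (List.getElem_mem hlast)
    have hlt : cells[j] < cells[j + 1] := pvMono_lt cells hs hj hlast (by omega)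
    have hposL : cells[j] + 1 < L := by omega
    have harg : (cells[j] + 1) % L = cells[j] + 1 := Int.emod_eq_of_lt (by omega) hposL
    have hfind : cells.find? (fun c => decide (cells[j] + 1 ≤ c)) = some cells[j + 1] := by
      apply pvFind?_ge cells hs _ _ (List.getElem_mem hlast) (by omega)
      intro c' hc' hlt'
      obtain ⟨k, hk, hke⟩ := List.mem_iff_getElem.1 hc'
      rcases (by omega : k ≤ j ∨ j + 1 ≤ k) with hkj | hkj
      · rcases (by omega : k = j ∨ k < j) with rfl | hkj'
        · omega
        · have := pvMono_lt cells hs hk hj hkj'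
          omega
      · rcases (by omega : k = j + 1 ∨ j + 1 < k) with rfl | hkj'
        · omega
        · have := pvMono_lt cells hs hlast hk hkj'
          omega
    rw [harg]
    unfold pvNext
    rw [hfind, hidx]
    simp only [Option.getD_some]
    have : ((j : Int) + 1).toNat = j + 1 := by omega
    rw [this, List.getD_eq_getElem _ _ hlast]
  · have hj1 : j + 1 = cells.length := by omega
    have hidx : ((j : Int) + 1) % (cells.length : Int) = 0 := by
      have : (j : Int) + 1 = (cells.length : Int) := by exact_mod_cast hj1
      rw [this, Int.emod_self]
    rw [hidx]
    have hmax : ∀ c' ∈ cells, c' ≤ cells[j] := by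
      intro c' hc'
      obtain ⟨k, hk, hke⟩ := List.mem_iff_getElem.1 hc'
      rcases (by omega : k = j ∨ k < j) with rfl | hkj'
      · omega
      · have := pvMono_lt cells hs hk hj hkj'
        omega
    have hgd : cells.getD (0 : Int).toNat 0 = cells.headD 0 := by
      rw [pvHeadD_eq_getElem cells hne]
      exact List.getD_eq_getElem cells 0 hm
    by_cases hP : cells[j] + 1 < L
    · have harg : (cells[j] + 1) % L = cells[j] + 1 := Int.emod_eq_of_lt (by omega) hP
      rw [harg]
      have hnone : cells.find? (fun c => decide (cells[j] + 1 ≤ c)) = none := by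
        rw [List.find?_eq_none]
        intro c hc
        have := hmax c hc
        simp; omega
      unfold pvNext
      rw [hnone, hgd]
      rfl
    · have harg : (cells[j] + 1) % L = 0 := by
        have : cells[j] + 1 = L := by omega
        rw [this, Int.emod_self]
      rw [harg]
      have hh0 : 0 ≤ cells.headD 0 := ((hmem _).1 (pvHeadD_mem cells hne)).1
      have hsome : cells.find? (fun c => decide ((0 : Int) ≤ c)) = some (cells.headD 0) := by
        apply pvFind?_ge cells hs 0 _ (pvHeadD_mem cells hne) hh0
        intro c' hc' hlt'
        have := pvHeadD_min cells hs c' hc'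
        omega
      unfold pvNext
      rw [hsome, hgd]
      rfl

theorem pvGetD_pred (f : Int → Char) (L : Int) (cells : List Int)
    (hL : 0 < L) (hs : cells.Pairwise (· < ·)) (hne : cells ≠ [])
    (hmem : ∀ t, t ∈ cells ↔ 0 ≤ t ∧ t < L ∧ f t ≠ ' ')
    (j : Nat) (hj : j < cells.length) :
    cells.getD (((j : Int) - 1) % (cells.length : Int)).toNat 0
      = pvPrev cells ((cells[j] - 1) % L) := by
  have hm : 0 < cells.length := List.length_pos_iff.2 hne
  have hpb := (hmem cells[j]).1 (List.getElem_mem hj)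
  have hrne : cells.reverse ≠ [] := by simpa using hne
  have hds : cells.reverse.Pairwise (· > ·) := by rw [List.pairwise_reverse]; exact hs
  by_cases hfirst : 0 < j
  · have hj1 : j - 1 < cells.length := by omega
    have hidx : ((j : Int) - 1) % (cells.length : Int) = (j : Int) - 1 :=
      Int.emod_eq_of_lt (by omega) (by omega)
    have htb := (hmem cells[j - 1]).1 (List.getElem_mem hj1)
    have hlt : cells[j - 1] < cells[j] := pvMono_lt cells hs hj1 hj (by omega)
    have harg : (cells[j] - 1) % L = cells[j] - 1 := Int.emod_eq_of_lt (by omega) (by omega)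
    have hfind : cells.reverse.find? (fun c => decide (c ≤ cells[j] - 1)) = some cells[j - 1] := by
      apply pvFind?_le_rev cells hs _ _ (List.getElem_mem hj1) (by omega)
      intro c' hc' hle'
      obtain ⟨k, hk, hke⟩ := List.mem_iff_getElem.1 hc'
      rcases (by omega : k ≤ j - 1 ∨ j ≤ k) with hkj | hkj
      · rcases (by omega : k = j - 1 ∨ k < j - 1) with rfl | hkj'
        · omega
        · have := pvMono_lt cells hs hk hj1 hkj'
          omega
      · rcases (by omega : k = j ∨ j < k) with rfl | hkj'
        · omega
        · have := pvMono_lt cells hs hj hk hkj'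
          omega
    rw [harg]
    unfold pvPrev
    rw [hfind, hidx]
    simp only [Option.getD_some]
    have : ((j : Int) - 1).toNat = j - 1 := by omega
    rw [this, List.getD_eq_getElem _ _ hj1]
  · have hj0 : (j : Int) = 0 := by omega
    have hmod : ((j : Int) - 1) % (cells.length : Int) = (cells.length : Int) - 1 := by
      apply pvEmodEq _ _ _ (by exact_mod_cast hm) ⟨-1, by rw [hj0]; ring⟩ (by omega)
        (by omega)
    rw [hmod]
    have hlastidx : ((cells.length : Int) - 1).toNat = cells.length - 1 := by omega
    have hlast : cells.length - 1 < cells.length := by omega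
    have hrevh : cells.reverse.headD 0 = cells[cells.length - 1] := by
      rw [pvHeadD_eq_getElem cells.reverse hrne]
      rw [List.getElem_reverse]
      simp
    have hgd : cells.getD ((cells.length : Int) - 1).toNat 0 = cells.reverse.headD 0 := by
      rw [hlastidx, List.getD_eq_getElem _ _ hlast, hrevh]
    have hmin : ∀ c' ∈ cells, cells[j] ≤ c' := by
      intro c' hc'
      have h1 := pvHeadD_min cells hs c' hc'
      rw [pvHeadD_eq_getElem cells hne] at h1
      have h2 : cells[0]'(List.length_pos_iff.2 hne) = cells[j] := by congr 1; omega
      rw [h2] at h1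
      exact h1
    by_cases h0 : 0 < cells[j]
    · have harg : (cells[j] - 1) % L = cells[j] - 1 := Int.emod_eq_of_lt (by omega) (by omega)
      rw [harg]
      have hnone : cells.reverse.find? (fun c => decide (c ≤ cells[j] - 1)) = none := by
        rw [List.find?_eq_none]
        intro c hc
        have hcm : c ∈ cells := by simpa using hc
        have := hmin c hcm
        simp; omega
      unfold pvPrev
      rw [hnone, hgd]
      rfl
    · have hz : cells[j] = 0 := by omega
      have harg : (cells[j] - 1) % L = L - 1 := by
        rw [hz]
        exact pvEmodEq _ _ _ hL ⟨-1, by ring⟩ (by omega) (by omega)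
      rw [harg]
      have hhm : cells.reverse.headD 0 ∈ cells := by simpa using pvHeadD_mem cells.reverse hrne
      have hhL : cells.reverse.headD 0 < L := ((hmem _).1 hhm).2.1
      have hsome : cells.reverse.find? (fun c => decide (c ≤ L - 1))
          = some (cells.reverse.headD 0) := by
        apply pvFind?_le_desc cells.reverse hds (L - 1) _ (pvHeadD_mem cells.reverse hrne)
          (by omega)
        intro c' hc' _
        exact pvHeadD_max_desc cells.reverse hds c' hc'
      unfold pvPrev
      rw [hsome, hgd]
      rfl

-- ---------- one A-step lands on the neighbouring cell of the list ----------

theorem pvStepCell (f : Int → Char) (L : Int) (cells : List Int) (d : Int)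
    (pk : pvLineOK f L cells) (hd : d = 1 ∨ d = -1)
    (j : Nat) (hj : j < cells.length) :
    pvScanA f L d L.toNat (PySem.Int.mod (cells[j] + d) L)
      = cells.getD ((PySem.Int.mod ((j : Int) + d) (cells.length : Int)).toNat) 0 := by
  obtain ⟨hL, hs, hne, hmem⟩ := pk
  have hm : 0 < cells.length := List.length_pos_iff.2 hne
  have hmz : (0 : Int) < (cells.length : Int) := by exact_mod_cast hm
  rw [PySem.Int.mod_eq_emod_of_pos hL, PySem.Int.mod_eq_emod_of_pos hmz]
  have hs0 : 0 ≤ (cells[j] + d) % L := Int.emod_nonneg _ (by omega)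
  have hs1 : (cells[j] + d) % L < L := Int.emod_lt_of_pos _ hL
  rcases hd with rfl | rfl
  · rw [pvScanA_next f L cells hL hs hne hmem L.toNat _ hs0 hs1 (by
      have h1 := Int.emod_nonneg (pvNext cells ((cells[j] + 1) % L) - (cells[j] + 1) % L) (by omega : L ≠ 0)
      have h2 := Int.emod_lt_of_pos (pvNext cells ((cells[j] + 1) % L) - (cells[j] + 1) % L) hL
      omega)]
    exact (pvGetD_succ f L cells hL hs hne hmem j hj).symm
  · have harg : cells[j] + (-1) = cells[j] - 1 := by ring
    have harg2 : (j : Int) + (-1) = (j : Int) - 1 := by ring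
    rw [harg, harg2]
    rw [pvScanA_prev f L cells hL hs hne hmem L.toNat _ (Int.emod_nonneg _ (by omega))
      (Int.emod_lt_of_pos _ hL) (by
      have h1 := Int.emod_nonneg ((cells[j] - 1) % L - pvPrev cells ((cells[j] - 1) % L)) (by omega : L ≠ 0)
      have h2 := Int.emod_lt_of_pos ((cells[j] - 1) % L - pvPrev cells ((cells[j] - 1) % L)) hL
      omega)]
    exact (pvGetD_pred f L cells hL hs hne hmem j hj).symm

-- ---------- the per-move equivalences at line level ----------

theorem pvLineA_walk (f : Int → Char) (L : Int) (cells : List Int) (d : Int)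
    (pk : pvLineOK f L cells) (hd : d = 1 ∨ d = -1) :
    ∀ (n : Nat) (j : Nat) (pos : Int), j < cells.length → cells.getD j 0 = pos →
      f pos = '.' → pvLineA f L d n pos = pvWalkB f cells d n j pos := by
  intro n
  induction n with
  | zero => intro j pos _ _ _; rfl
  | succ n ih =>
    intro j pos hj hpos hdot
    obtain ⟨hL, hs, hne, hmem⟩ := pk
    have hm : 0 < cells.length := List.length_pos_iff.2 hne
    have hmz : (0 : Int) < (cells.length : Int) := by exact_mod_cast hm
    have hje : cells[j] = pos := by rw [← hpos, List.getD_eq_getElem _ _ hj]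
    have hstep := pvStepCell f L cells d ⟨hL, hs, hne, hmem⟩ hd j hj
    rw [hje] at hstep
    have hj' : (PySem.Int.mod ((j : Int) + d) (cells.length : Int)).toNat < cells.length := by
      rw [PySem.Int.mod_eq_emod_of_pos hmz]
      have h1 := Int.emod_nonneg ((j : Int) + d) (by omega : (cells.length : Int) ≠ 0)
      have h2 := Int.emod_lt_of_pos ((j : Int) + d) hmz
      omega
    simp only [pvLineA, pvWalkB, hstep]
    split
    · next hcc =>
      rw [if_neg (fun hne' => hne' hcc)]
      exact ih _ _ hj' rfl hcc
    · next _ => rfl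

theorem pvLineA_all (f : Int → Char) (L : Int) (cells : List Int) (d : Int)
    (pk : pvLineOK f L cells) (hd : d = 1 ∨ d = -1)
    (hall : ∀ c ∈ cells, f c = '.') :
    ∀ (n : Nat) (j : Nat) (pos : Int), j < cells.length → cells.getD j 0 = pos →
      pvLineA f L d n pos
        = cells.getD ((PySem.Int.mod ((j : Int) + d * (n : Int)) (cells.length : Int)).toNat) 0 := by
  intro n
  induction n with
  | zero =>
    intro j pos hj hpos
    obtain ⟨hL, hs, hne, hmem⟩ := pk
    have hmz : (0 : Int) < (cells.length : Int) := by
      exact_mod_cast List.length_pos_iff.2 hne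
    have : (PySem.Int.mod ((j : Int) + d * ((0 : Nat) : Int)) (cells.length : Int)) = (j : Int) := by
      rw [PySem.Int.mod_eq_emod_of_pos hmz]
      push_cast
      rw [mul_zero, add_zero]
      exact Int.emod_eq_of_lt (by omega) (by exact_mod_cast hj)
    rw [this]
    simpa using hpos.symm
  | succ n ih =>
    intro j pos hj hpos
    obtain ⟨hL, hs, hne, hmem⟩ := pk
    have hm : 0 < cells.length := List.length_pos_iff.2 hne
    have hmz : (0 : Int) < (cells.length : Int) := by exact_mod_cast hm
    have hje : cells[j] = pos := by rw [← hpos, List.getD_eq_getElem _ _ hj]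
    have hstep := pvStepCell f L cells d ⟨hL, hs, hne, hmem⟩ hd j hj
    rw [hje] at hstep
    have hj'lt : (PySem.Int.mod ((j : Int) + d) (cells.length : Int)).toNat < cells.length := by
      rw [PySem.Int.mod_eq_emod_of_pos hmz]
      have h1 := Int.emod_nonneg ((j : Int) + d) (by omega : (cells.length : Int) ≠ 0)
      have h2 := Int.emod_lt_of_pos ((j : Int) + d) hmz
      omega
    have hcmem : cells.getD ((PySem.Int.mod ((j : Int) + d) (cells.length : Int)).toNat) 0 ∈ cells := by
      rw [List.getD_eq_getElem _ _ hj'lt]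
      exact List.getElem_mem hj'lt
    have hcdot := hall _ hcmem
    simp only [pvLineA, hstep, hcdot, if_true]
    rw [ih _ _ hj'lt rfl]
    congr 1
    rw [PySem.Int.mod_eq_emod_of_pos hmz, PySem.Int.mod_eq_emod_of_pos hmz,
        PySem.Int.mod_eq_emod_of_pos hmz]
    have hcast : (((((j : Int) + d) % (cells.length : Int)).toNat : Int))
        = ((j : Int) + d) % (cells.length : Int) := by
      have h1 := Int.emod_nonneg ((j : Int) + d) (by omega : (cells.length : Int) ≠ 0)
      omega
    rw [hcast, Int.emod_add_emod]
    congr 2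
    push_cast
    ring

theorem pvMoveB_eq (f : Int → Char) (L : Int) (cells : List Int) (d : Int)
    (pk : pvLineOK f L cells) (hd : d = 1 ∨ d = -1)
    (pos : Int) (hdot : f pos = '.') (hposmem : pos ∈ cells) (n : Int) (hn : 0 ≤ n) :
    pvLineA f L d n.toNat pos = pvMoveB f cells d pos n := by
  obtain ⟨j, hj, hje⟩ := List.mem_iff_getElem.1 hposmem
  have hcnt : cells.countP (fun c => decide (c < pos)) = j := by
    rw [← hje]
    exact pvCountP_getElem cells pk.2.1 j hj
  unfold pvMoveB
  rw [hcnt]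
  by_cases hall : cells.all (fun c => f c = '.')
  · simp only [hall, if_true]
    have hall' : ∀ c ∈ cells, f c = '.' := by
      intro c hc
      exact of_decide_eq_true (List.all_eq_true.1 hall c hc)
    rw [pvLineA_all f L cells d pk hd hall' n.toNat j pos hj
      (by rw [List.getD_eq_getElem _ _ hj]; exact hje)]
    rw [Int.toNat_of_nonneg hn]
  · simp only [hall]
    exact pvLineA_walk f L cells d pk hd n.toNat j pos hj
      (by rw [List.getD_eq_getElem _ _ hj]; exact hje) hdot

theorem pvMoveB_noDot (f : Int → Char) (cells : List Int) (d : Int)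
    (hne : cells ≠ []) (hnd : ∀ t, f t ≠ '.') (pos n : Int) :
    pvMoveB f cells d pos n = pos := by
  have hall : cells.all (fun c => f c = '.') = false := by
    cases cells with
    | nil => exact absurd rfl hne
    | cons b tl =>
      simp only [List.all_cons, Bool.and_eq_false_iff]
      left
      simp [hnd b]
  unfold pvMoveB
  rw [hall]
  simp only [Bool.false_eq_true, if_false]
  cases hnt : n.toNat with
  | zero => rfl
  | succ k => simp [pvWalkB, hnd _]

-- ---------- bridges between the two ports' primitives ----------

theorem pvCellB_eq_cellA : pvCellB = pvCellA := rfl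
theorem pvRowLenB_eq_rowLenA : pvRowLenB = pvRowLenA := rfl

theorem pvCellA_eq_getElem (board : List String) (y t : Int) (hy0 : 0 ≤ y)
    (hyh : y.toNat < board.length) (ht0 : 0 ≤ t)
    (htl : t.toNat < (board[y.toNat]).toList.length) :
    pvCellA board y t = (board[y.toNat]).toList[t.toNat] := by
  have hsome : PySem.List.pyGet? board y = some (board[y.toNat]) := by
    rw [PySem.List.pyGet?_of_nonneg _ hy0]
    exact List.getElem?_eq_getElem hyh
  have hsome2 : PySem.List.pyGet? (board[y.toNat]).toList t
      = some ((board[y.toNat]).toList[t.toNat]) := by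
    rw [PySem.List.pyGet?_of_nonneg _ ht0]
    exact List.getElem?_eq_getElem htl
  unfold pvCellA
  rw [hsome]
  simp [PySem.Str.pyGet?_eq, PySem.Chars.pyGet?_eq_listPyGet?, hsome2]

theorem pvRowLenA_eq (board : List String) (y : Int) (hy0 : 0 ≤ y)
    (hyh : y.toNat < board.length) :
    pvRowLenA board y = ((board[y.toNat]).toList.length : Int) := by
  have hsome : PySem.List.pyGet? board y = some (board[y.toNat]) := by
    rw [PySem.List.pyGet?_of_nonneg _ hy0]
    exact List.getElem?_eq_getElem hyh
  unfold pvRowLenA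
  rw [hsome]
  show PySem.Str.len board[y.toNat] = _
  rw [PySem.Str.len]

theorem pvRowLenA_eq_W (board : List String)
    (hrect : ∀ r ∈ board, r.toList.length = (board.headD "").toList.length)
    (y : Int) (hy0 : 0 ≤ y) (hyh : y.toNat < board.length) :
    pvRowLenA board y = pvW board := by
  rw [pvRowLenA_eq board y hy0 hyh]
  unfold pvW
  exact_mod_cast hrect _ (List.getElem_mem hyh)

theorem pvCellA_ne_dot (board : List String) (hnd : pvNoDot board) (y t : Int) :
    pvCellA board y t ≠ '.' := by
  unfold pvCellA
  cases hg : PySem.List.pyGet? board y with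
  | none => simp
  | some r =>
    have hrm : r ∈ board := PySem.List.mem_of_pyGet?_eq_some _ hg
    simp only [PySem.Str.pyGet?_eq, PySem.Chars.pyGet?_eq_listPyGet?]
    cases hc : PySem.List.pyGet? r.toList t with
    | none => simp
    | some c =>
      have hcm : c ∈ r.toList := PySem.List.mem_of_pyGet?_eq_some _ hc
      simp only [Option.getD_some]
      intro hcd
      exact (hnd r hrm) (hcd ▸ hcm)

-- ---------- B's precomputed structures describe the board's lines ----------

theorem pvMaxD_W (board : List String) (hne : board ≠ [])
    (hrect : ∀ r ∈ board, r.toList.length = (board.headD "").toList.length) :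
    PySem.List.maxD (board.map PySem.Str.len) (fun v => v) 0 = pvW board := by
  unfold PySem.List.maxD
  cases hm : PySem.List.max? (board.map PySem.Str.len) (fun v => v) with
  | none =>
    rw [PySem.List.max?_eq_none_iff] at hm
    simp at hm
    exact absurd hm hne
  | some v =>
    have hv := PySem.List.max?_mem hm
    obtain ⟨r, hr, hrv⟩ := List.mem_map.1 hv
    simp only [Option.getD_some]
    rw [← hrv]
    show PySem.Str.len r = pvW board
    rw [PySem.Str.len]
    unfold pvW
    exact_mod_cast hrect r hr

-- row y's non-space position list is exactly the line package of row y (ragged boards fine)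
theorem pvRowsOK (board : List String) (y : Nat) (hy : y < board.length)
    (hns : ∃ t : Int, 0 ≤ t ∧ t < pvRowLenA board (y : Int) ∧ pvCellA board (y : Int) t ≠ ' ') :
    pvLineOK (fun t => pvCellA board (y : Int) t) (pvRowLenA board (y : Int))
      ((pvRowsB board).getD y []) := by
  have hW : pvRowLenA board (y : Int) = ((board[y]).toList.length : Int) := by
    have := pvRowLenA_eq board (y : Int) (by omega) (by simpa using hy)
    simpa using this
  have hylen : y < (pvRowsB board).length := by
    simp only [pvRowsB, List.length_map]
    exact hy
  have hcells : (pvRowsB board).getD y []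
      = (PySem.List.enumerate (board[y]).toList 0).filterMap
          (fun q => if q.2 ≠ ' ' then some q.1 else none) := by
    rw [List.getD_eq_getElem _ _ hylen]
    simp [pvRowsB]
  have hmem : ∀ t, t ∈ (pvRowsB board).getD y []
      ↔ 0 ≤ t ∧ t < pvRowLenA board (y : Int) ∧ pvCellA board (y : Int) t ≠ ' ' := by
    intro t
    rw [hcells]
    constructor
    · intro ht
      obtain ⟨q, hq, hqe⟩ := List.mem_filterMap.1 ht
      obtain ⟨k, hk, rfl⟩ := (PySem.List.mem_enumerate_iff _ _ _).1 hq
      by_cases hsp : (board[y]).toList[k] ≠ ' '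
      · rw [if_pos hsp] at hqe
        have hte : t = (k : Int) := by
          simp at hqe
          omega
        subst hte
        have hcell : pvCellA board (y : Int) (k : Int)
            = (board[y]).toList[k] := by
          rw [pvCellA_eq_getElem board (y : Int) (k : Int) (by omega) (by simpa using hy)
            (by omega) (by simpa using hk)]
          simp
        refine ⟨by omega, by omega, by rw [hcell]; exact hsp⟩
      · simp only [hsp, if_false] at hqe
        exact absurd hqe (by simp)
    · intro ⟨ht0, htW, htc⟩
      have htlen : t.toNat < (board[y]).toList.length := by omega
      have hcell : pvCellA board (y : Int) t = (board[y]).toList[t.toNat] :=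
        pvCellA_eq_getElem board (y : Int) t (by omega) (by simpa using hy) ht0 htlen
      apply List.mem_filterMap.2
      refine ⟨((t.toNat : Int), (board[y]).toList[t.toNat]), ?_, ?_⟩
      · rw [PySem.List.mem_enumerate_iff]
        exact ⟨t.toNat, htlen, by simp⟩
      · have hnsp : (board[y]).toList[t.toNat] ≠ ' ' := by rw [← hcell]; exact htc
        rw [if_pos hnsp]
        congr 1
        omega
  obtain ⟨t0, ht00, ht0W, ht0c⟩ := hns
  refine ⟨by omega, ?_, List.ne_nil_of_mem ((hmem t0).2 ⟨ht00, ht0W, ht0c⟩), hmem⟩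
  rw [hcells]
  rw [List.pairwise_filterMap]
  apply List.Pairwise.imp _ (PySem.List.pairwise_lt_enumerate (board[y]).toList 0)
  intro a b hab u hu v hv
  have hua : u = a.1 := by
    by_cases h : a.2 ≠ ' ' <;> simp [h] at hu
    omega
  have hvb : v = b.1 := by
    by_cases h : b.2 ≠ ' ' <;> simp [h] at hv
    omega
  omega

-- column x's non-space position list is the line package of column x (needs rectangularity)
theorem pvColsOK (board : List String)
    (hrect : ∀ r ∈ board, r.toList.length = (board.headD "").toList.length)
    (hw : 0 < (board.headD "").toList.length)
    (x : Nat) (hx : x < (board.headD "").toList.length)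
    (hns : ∃ t : Int, 0 ≤ t ∧ t < (board.length : Int) ∧ pvCellA board t (x : Int) ≠ ' ') :
    pvLineOK (fun t => pvCellA board t (x : Int)) ((board.length : Int))
      ((pvColsB board (pvW board)).getD x []) := by
  have hbne : board ≠ [] := by
    intro h
    rw [h] at hw
    simp at hw
  have hb0 : 0 < board.length := List.length_pos_iff.2 hbne
  have hxW : (x : Int) < pvW board := by unfold pvW; omega
  have hxlen : x < (pvColsB board (pvW board)).length := by
    simp only [pvColsB, List.length_map, PySem.List.length_pyRange_one]
    unfold pvW
    omega
  have hcells : (pvColsB board (pvW board)).getD x []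
      = (PySem.List.pyRange 0 (board.length : Int) 1).filterMap
          (fun yy => if (x : Int) < pvRowLenB board yy ∧ pvCellB board yy (x : Int) ≠ ' '
            then some yy else none) := by
    rw [List.getD_eq_getElem _ _ hxlen]
    simp only [pvColsB, List.getElem_map, PySem.List.getElem_pyRange_one]
    norm_num
  have hrl : ∀ yy : Int, 0 ≤ yy → yy < (board.length : Int) →
      pvRowLenA board yy = pvW board := by
    intro yy h0 h1
    exact pvRowLenA_eq_W board hrect yy h0 (by omega)
  have hmem : ∀ t, t ∈ (pvColsB board (pvW board)).getD x []
      ↔ 0 ≤ t ∧ t < (board.length : Int) ∧ pvCellA board t (x : Int) ≠ ' ' := by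
    intro t
    rw [hcells]
    constructor
    · intro ht
      obtain ⟨yy, hyy, hye⟩ := List.mem_filterMap.1 ht
      have hyr := PySem.List.mem_pyRange_one.1 hyy
      by_cases hcond : (x : Int) < pvRowLenB board yy ∧ pvCellB board yy (x : Int) ≠ ' '
      · rw [if_pos hcond] at hye
        injection hye with hye
        subst hye
        rw [pvCellB_eq_cellA] at hcond
        exact ⟨hyr.1, hyr.2, hcond.2⟩
      · rw [if_neg hcond] at hye
        exact absurd hye (by simp)
    · intro ⟨ht0, hth, htc⟩
      apply List.mem_filterMap.2
      refine ⟨t, PySem.List.mem_pyRange_one.2 ⟨ht0, hth⟩, ?_⟩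
      have hcond : (x : Int) < pvRowLenB board t ∧ pvCellB board t (x : Int) ≠ ' ' := by
        rw [pvCellB_eq_cellA, pvRowLenB_eq_rowLenA, hrl t ht0 hth]
        exact ⟨hxW, htc⟩
      rw [if_pos hcond]
  obtain ⟨t0, ht00, ht0h, ht0c⟩ := hns
  refine ⟨by omega, ?_, List.ne_nil_of_mem ((hmem t0).2 ⟨ht00, ht0h, ht0c⟩), hmem⟩
  rw [hcells]
  rw [List.pairwise_filterMap]
  apply List.Pairwise.imp _ (PySem.List.pairwise_lt_pyRange_one 0 (board.length : Int))
  intro a b hab u hu v hv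
  have hua : u = a := by
    by_cases h : (x : Int) < pvRowLenB board a ∧ pvCellB board a (x : Int) ≠ ' ' <;>
      simp [h] at hu
    omega
  have hvb : v = b := by
    by_cases h : (x : Int) < pvRowLenB board b ∧ pvCellB board b (x : Int) ≠ ' ' <;>
      simp [h] at hv
    omega
  omega

-- ---------- A's 2D step reduced to a line scan ----------

theorem pvW_def (board : List String) : pvW board = ((board.headD "").toList.length : Int) := rfl

theorem pvStepA_H (board : List String) (dx x y : Int)
    (hy0 : 0 ≤ y) (hyh : y < (board.length : Int)) (hL : 0 < pvRowLenA board y) :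
    pvStepA board dx 0 (x, y) =
      (let s := pvScanA (fun t => pvCellA board y t) (pvRowLenA board y) dx
         (pvRowLenA board y).toNat (PySem.Int.mod (x + dx) (pvRowLenA board y));
       if pvCellA board y s = '.' then (true, (s, y))
       else if pvCellA board y s = '#' then (false, (x, y)) else (true, (x, y))) := by
  have hW0 : ¬ (pvRowLenA board y = 0 ∨ ((board.length : Int)) = 0) := by
    push Not
    omega
  have hny0 : PySem.Int.mod (y + 0) (board.length : Int) = y := by
    rw [add_zero, PySem.Int.mod_eq_emod_of_pos (by omega)]
    exact Int.emod_eq_of_lt hy0 hyh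
  show (let w := pvRowLenA board (x, y).2; _) = _
  simp only [pvStepA, hny0, if_neg hW0, pvScanA_d_zero]

theorem pvStepA_V (board : List String) (dy x y : Int)
    (hx0 : 0 ≤ x) (hxL : x < pvRowLenA board y) (hy0 : 0 ≤ y) (hyh : y < (board.length : Int)) :
    pvStepA board 0 dy (x, y) =
      (let s := pvScanA (fun t => pvCellA board t x) ((board.length : Int)) dy
         ((board.length : Int)).toNat (PySem.Int.mod (y + dy) (board.length : Int));
       if pvCellA board s x = '.' then (true, (x, s))
       else if pvCellA board s x = '#' then (false, (x, y)) else (true, (x, y))) := by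
  have hW0 : ¬ (pvRowLenA board y = 0 ∨ ((board.length : Int)) = 0) := by
    push Not
    omega
  have hnx0 : PySem.Int.mod (x + 0) (pvRowLenA board y) = x := by
    rw [add_zero, PySem.Int.mod_eq_emod_of_pos (by omega)]
    exact Int.emod_eq_of_lt hx0 hxL
  show (let w := pvRowLenA board (x, y).2; _) = _
  simp only [pvStepA, hnx0, if_neg hW0, pvScanA_d_zero]

theorem pvRunA_fix (board : List String) (dx dy : Int) (c : Int × Int)
    (h : pvStepA board dx dy c = (true, c)) : ∀ n, pvRunA board dx dy n c = c := by
  intro n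
  induction n with
  | zero => rfl
  | succ n ih => simp only [pvRunA, h, ih]

theorem pvScanA_range (f : Int → Char) (L d : Int) (hL : 0 < L) :
    ∀ (fuel : Nat) (s : Int), 0 ≤ s → s < L →
      0 ≤ pvScanA f L d fuel s ∧ pvScanA f L d fuel s < L := by
  intro fuel
  induction fuel with
  | zero => intro s h0 h1; exact ⟨h0, h1⟩
  | succ fuel ih =>
    intro s h0 h1
    by_cases hc : f s = ' ' ∧ d ≠ 0
    · simp only [pvScanA, if_pos hc]
      exact ih _ (PySem.Int.mod_nonneg _ hL) (PySem.Int.mod_lt _ hL)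
    · simp only [pvScanA, if_neg hc]
      exact ⟨h0, h1⟩

theorem pvRunA_H (board : List String) (dx y : Int)
    (hy0 : 0 ≤ y) (hyh : y < (board.length : Int)) (hL : 0 < pvRowLenA board y) :
    ∀ (n : Nat) (x : Int),
      pvRunA board dx 0 n (x, y)
        = (pvLineA (fun t => pvCellA board y t) (pvRowLenA board y) dx n x, y) := by
  intro n
  induction n with
  | zero => intro x; rfl
  | succ n ih =>
    intro x
    have hstep := pvStepA_H board dx x y hy0 hyh hL
    simp only at hstep
    simp only [pvRunA, pvLineA, hstep]
    by_cases h1 : pvCellA board y (pvScanA (fun t => pvCellA board y t) (pvRowLenA board y) dx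
        (pvRowLenA board y).toNat (PySem.Int.mod (x + dx) (pvRowLenA board y))) = '.'
    · simp only [if_pos h1]
      exact ih _
    · by_cases h2 : pvCellA board y (pvScanA (fun t => pvCellA board y t) (pvRowLenA board y) dx
          (pvRowLenA board y).toNat (PySem.Int.mod (x + dx) (pvRowLenA board y))) = '#'
      · simp only [if_neg h1, if_pos h2]
      · simp only [if_neg h1, if_neg h2]
        have hfix : pvStepA board dx 0 (x, y) = (true, (x, y)) := by
          rw [hstep]
          simp only [if_neg h1, if_neg h2]
        rw [pvRunA_fix board dx 0 (x, y) hfix n]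

theorem pvRunA_V (board : List String) (dy x : Int) (hx0 : 0 ≤ x)
    (hxall : ∀ y' : Int, 0 ≤ y' → y' < (board.length : Int) → x < pvRowLenA board y') :
    ∀ (n : Nat) (y : Int), 0 ≤ y → y < (board.length : Int) →
      pvRunA board 0 dy n (x, y)
        = (x, pvLineA (fun t => pvCellA board t x) ((board.length : Int)) dy n y) := by
  intro n
  induction n with
  | zero => intro y _ _; rfl
  | succ n ih =>
    intro y hy0 hyh
    have hb0 : (0 : Int) < (board.length : Int) := by omega
    have hstep := pvStepA_V board dy x y hx0 (hxall y hy0 hyh) hy0 hyh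
    simp only at hstep
    simp only [pvRunA, pvLineA, hstep]
    have hrange := pvScanA_range (fun t => pvCellA board t x) ((board.length : Int)) dy hb0
      ((board.length : Int)).toNat (PySem.Int.mod (y + dy) (board.length : Int))
      (PySem.Int.mod_nonneg _ hb0) (PySem.Int.mod_lt _ hb0)
    by_cases h1 : pvCellA board (pvScanA (fun t => pvCellA board t x) ((board.length : Int)) dy
        ((board.length : Int)).toNat (PySem.Int.mod (y + dy) (board.length : Int))) x = '.'
    · simp only [if_pos h1]
      exact ih _ hrange.1 hrange.2
    · by_cases h2 : pvCellA board (pvScanA (fun t => pvCellA board t x) ((board.length : Int)) dy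
          ((board.length : Int)).toNat (PySem.Int.mod (y + dy) (board.length : Int))) x = '#'
      · simp only [if_neg h1, if_pos h2]
      · simp only [if_neg h1, if_neg h2]
        have hfix : pvStepA board 0 dy (x, y) = (true, (x, y)) := by
          rw [hstep]
          simp only [if_neg h1, if_neg h2]
        rw [pvRunA_fix board 0 dy (x, y) hfix n]

-- ---------- boards without any '.' never move ----------

theorem pvStepA_noDot (board : List String) (hnd : pvNoDot board) (dx dy : Int)
    (c : Int × Int) :
    pvStepA board dx dy c = (true, c) ∨ pvStepA board dx dy c = (false, c) := by
  unfold pvStepA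
  dsimp only
  split_ifs with h1 h2 h3
  · right; rfl
  · exact absurd h2 (pvCellA_ne_dot board hnd _ _)
  · right; rfl
  · left; rfl

theorem pvRunA_noDot (board : List String) (hnd : pvNoDot board) (dx dy : Int) :
    ∀ (n : Nat) (c : Int × Int), pvRunA board dx dy n c = c := by
  intro n
  induction n with
  | zero => intro c; rfl
  | succ n ih =>
    intro c
    rcases pvStepA_noDot board hnd dx dy c with h | h
    · simp only [pvRunA, h, ih]
    · simp only [pvRunA, h]

-- ---------- the line walk stays on valid '.' cells ----------

theorem pvLineA_res (f : Int → Char) (L d : Int) (hL : 0 < L) :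
    ∀ (n : Nat) (pos : Int), 0 ≤ pos → pos < L →
      0 ≤ pvLineA f L d n pos ∧ pvLineA f L d n pos < L ∧
        (pvLineA f L d n pos = pos ∨ f (pvLineA f L d n pos) = '.') := by
  intro n
  induction n with
  | zero =>
    intro pos h0 h1
    exact ⟨h0, h1, Or.inl (rfl : pvLineA f L d 0 pos = pos)⟩
  | succ n ih =>
    intro pos h0 h1
    have hrange := pvScanA_range f L d hL L.toNat (PySem.Int.mod (pos + d) L)
      (PySem.Int.mod_nonneg _ hL) (PySem.Int.mod_lt _ hL)
    simp only [pvLineA]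
    by_cases hc : f (pvScanA f L d L.toNat (PySem.Int.mod (pos + d) L)) = '.'
    · simp only [if_pos hc]
      obtain ⟨b1, b2, b3⟩ := ih _ hrange.1 hrange.2
      refine ⟨b1, b2, Or.inr ?_⟩
      rcases b3 with he | hd'
      · rw [he]; exact hc
      · exact hd'
    · simp only [if_neg hc]
      refine ⟨h0, h1, ?_⟩
      simp

-- ---------- the two ports find the same start cell ----------

theorem pvStartRowA_none : ∀ (cs : List Char) (x0 : Int),
    pvStartRowA cs x0 = none ↔ '.' ∉ cs := by
  intro cs
  induction cs with
  | nil => intro x0; simp [pvStartRowA]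
  | cons c tl ih =>
    intro x0
    by_cases hc : c = '.'
    · simp [pvStartRowA, hc]
    · simp only [pvStartRowA, if_neg hc, List.mem_cons]
      rw [ih (x0 + 1)]
      constructor
      · intro h hm
        rcases hm with hm | hm
        · exact hc hm.symm
        · exact h hm
      · intro h hm
        exact h (Or.inr hm)

theorem pvStartRowA_some : ∀ (cs : List Char) (x0 x : Int),
    pvStartRowA cs x0 = some x →
      ∃ (k : Nat) (hk : k < cs.length), x = x0 + k ∧ cs[k] = '.' := by
  intro cs
  induction cs with
  | nil => intro x0 x h; simp [pvStartRowA] at h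
  | cons c tl ih =>
    intro x0 x h
    by_cases hc : c = '.'
    · simp only [pvStartRowA, if_pos hc, Option.some.injEq] at h
      exact ⟨0, by simp, by omega, by simpa using hc⟩
    · simp only [pvStartRowA, if_neg hc] at h
      obtain ⟨k, hk, hke, hkc⟩ := ih (x0 + 1) x h
      exact ⟨k + 1, by simpa using hk, by omega, by simpa using hkc⟩

theorem pvRowStarts_none : ∀ (cs : List Char) (x0 yv : Int),
    pvStartRowA cs x0 = none →
      (PySem.List.enumerate cs x0).filterMap
        (fun r => if r.2 = '.' then some (r.1, yv) else none) = [] := by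
  intro cs
  induction cs with
  | nil => intro x0 yv _; simp [PySem.List.enumerate_nil]
  | cons c tl ih =>
    intro x0 yv h
    by_cases hc : c = '.'
    · simp [pvStartRowA, hc] at h
    · simp only [pvStartRowA, if_neg hc] at h
      rw [PySem.List.enumerate_cons]
      simp only [List.filterMap_cons, if_neg hc]
      exact ih (x0 + 1) yv h

theorem pvRowStarts_some : ∀ (cs : List Char) (x0 x yv : Int),
    pvStartRowA cs x0 = some x →
      ∃ tl, (PySem.List.enumerate cs x0).filterMap
        (fun r => if r.2 = '.' then some (r.1, yv) else none) = (x, yv) :: tl := by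
  intro cs
  induction cs with
  | nil => intro x0 x yv h; simp [pvStartRowA] at h
  | cons c tl ih =>
    intro x0 x yv h
    by_cases hc : c = '.'
    · simp only [pvStartRowA, if_pos hc, Option.some.injEq] at h
      rw [PySem.List.enumerate_cons]
      simp only [List.filterMap_cons, if_pos hc]
      exact ⟨_, by rw [h]⟩
    · simp only [pvStartRowA, if_neg hc] at h
      rw [PySem.List.enumerate_cons]
      simp only [List.filterMap_cons, if_neg hc]
      exact ih (x0 + 1) x yv h

theorem pvStartAB : ∀ (bd : List String) (y0 : Int),
    pvStartA bd y0 = ((PySem.List.enumerate bd y0).flatMap (fun q =>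
      (PySem.List.enumerate q.2.toList 0).filterMap
        (fun r => if r.2 = '.' then some (r.1, q.1) else none))).headD (0, 0) := by
  intro bd
  induction bd with
  | nil => intro y0; simp [pvStartA, PySem.List.enumerate_nil]
  | cons r rest ih =>
    intro y0
    rw [PySem.List.enumerate_cons]
    simp only [List.flatMap_cons]
    cases h : pvStartRowA r.toList 0 with
    | some x =>
      obtain ⟨tl, htl⟩ := pvRowStarts_some r.toList 0 x y0 h
      simp only [pvStartA, h, htl]
      rfl
    | none =>
      have hnil := pvRowStarts_none r.toList 0 y0 h
      simp only [pvStartA, h, hnil, List.nil_append]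
      exact ih (y0 + 1)

theorem pvStartB_eq (board : List String) : pvStartB board = pvStartA board 0 :=
  (pvStartAB board 0).symm

-- the start search finds a '.' cell, or there is none and it returns (0, 0)
theorem pvStartA_spec : ∀ (bd : List String) (y0 : Int),
    (∃ (k : Nat) (hk : k < bd.length) (j : Nat) (hj : j < (bd[k]).toList.length),
      pvStartA bd y0 = ((j : Int), y0 + k) ∧ (bd[k]).toList[j] = '.')
    ∨ ((∀ r ∈ bd, '.' ∉ r.toList) ∧ pvStartA bd y0 = (0, 0)) := by
  intro bd
  induction bd with
  | nil => intro y0; right; exact ⟨by simp, rfl⟩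
  | cons r rest ih =>
    intro y0
    cases h : pvStartRowA r.toList 0 with
    | some x =>
      left
      obtain ⟨j, hj, hje, hjc⟩ := pvStartRowA_some r.toList 0 x h
      refine ⟨0, by simp, j, by simpa using hj, ?_, by simpa using hjc⟩
      simp only [pvStartA, h, Prod.mk.injEq]
      constructor
      · omega
      · omega
    | none =>
      rcases ih (y0 + 1) with ⟨k, hk, j, hj, heq, hch⟩ | ⟨hnd, heq⟩
      · left
        refine ⟨k + 1, by simpa using hk, j, by simpa using hj, ?_, by simpa using hch⟩
        have hcast : (y0 + 1) + (k : Int) = y0 + (((k + 1 : Nat)) : Int) := by push_cast; ring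
        simp only [pvStartA, h]
        rw [heq, hcast]
      · right
        refine ⟨?_, by simp only [pvStartA, h]; exact heq⟩
        intro r' hr'
        rcases List.mem_cons.1 hr' with rfl | hm
        · exact (pvStartRowA_none r'.toList 0).1 h
        · exact hnd r' hm

-- ---------- helper facts about the board's first row / column ----------

theorem pvHeadD_eq_get0 (board : List String) (h : board ≠ []) :
    board.headD "" = board[0]'(List.length_pos_iff.2 h) := by
  cases board with
  | nil => exact absurd rfl h
  | cons r rest => rfl

theorem pvRow0OK_facts (board : List String) (h : pvRow0OK board) :
    board ≠ [] ∧ 0 < pvRowLenA board 0 ∧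
      (∃ t : Int, 0 ≤ t ∧ t < pvRowLenA board 0 ∧ pvCellA board 0 t ≠ ' ') := by
  have hbne : board ≠ [] := by
    intro he
    rw [he] at h
    simp [pvRow0OK] at h
  have hb0 : 0 < board.length := List.length_pos_iff.2 hbne
  unfold pvRow0OK at h
  rw [List.any_eq_true] at h
  obtain ⟨c, hcm, hcs'⟩ := h
  have hcs : c ≠ ' ' := by simpa using hcs'
  rw [pvHeadD_eq_get0 board hbne] at hcm
  obtain ⟨k, hk, hke⟩ := List.mem_iff_getElem.1 hcm
  have hrl : pvRowLenA board 0 = ((board[0]).toList.length : Int) := by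
    have := pvRowLenA_eq board 0 le_rfl (by simpa using hb0)
    simpa using this
  have hcell : pvCellA board 0 (k : Int) = (board[0]).toList[k] := by
    have := pvCellA_eq_getElem board 0 (k : Int) le_rfl (by simpa using hb0)
      (by omega) (by simpa using hk)
    simpa using this
  refine ⟨hbne, by omega, ⟨(k : Int), by omega, by omega, ?_⟩⟩
  rw [hcell, hke]
  exact hcs

theorem pvCol0OK_facts (board : List String) (h : pvCol0OK board) :
    ∃ t : Int, 0 ≤ t ∧ t < (board.length : Int) ∧ pvCellA board t 0 ≠ ' ' := by
  unfold pvCol0OK at h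
  rw [List.any_eq_true] at h
  obtain ⟨r, hrm, hrc'⟩ := h
  have hrc : r.toList.headD ' ' ≠ ' ' := by simpa using hrc'
  obtain ⟨k, hk, hke⟩ := List.mem_iff_getElem.1 hrm
  have hrne : r.toList ≠ [] := by
    intro he
    rw [he] at hrc
    exact hrc rfl
  have hhd : ∀ (l : List Char) (_ : 0 < l.length), l.headD ' ' = l[0] := by
    intro l hl
    cases l with
    | nil => simp at hl
    | cons a tl => rfl
  have hrlen0 : 0 < (board[k]).toList.length := by
    rw [hke]
    exact List.length_pos_iff.2 hrne
  have hcell : pvCellA board (k : Int) 0 = (board[k]).toList[0] := by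
    have := pvCellA_eq_getElem board (k : Int) 0 (by omega) (by simpa using hk)
      le_rfl (by simpa using hrlen0)
    simpa using this
  refine ⟨(k : Int), by omega, by omega, ?_⟩
  rw [hcell, ← hhd _ hrlen0, hke]
  exact hrc

-- ---------- per-move equivalence, horizontal (ragged rows are fine) ----------

theorem pvMoveCase_H (board : List String) (dx : Int) (hdx : dx = 1 ∨ dx = -1)
    (x y n : Int) (hx0 : 0 ≤ x) (hxL : x < pvRowLenA board y)
    (hy0 : 0 ≤ y) (hyh : y < (board.length : Int))
    (hdotOr : pvCellA board y x = '.' ∨ (pvNoDot board ∧ x = 0 ∧ y = 0 ∧ pvRow0OK board))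
    (hn : 0 ≤ n) :
    pvRunA board dx 0 n.toNat (x, y)
      = (pvMoveB (fun c => pvCellA board y c) ((pvRowsB board).getD y.toNat []) dx x n, y)
    ∧ (0 ≤ (pvRunA board dx 0 n.toNat (x, y)).1
       ∧ (pvRunA board dx 0 n.toNat (x, y)).1 < pvRowLenA board y
       ∧ (pvRunA board dx 0 n.toNat (x, y)).2 = y
       ∧ (pvCellA board y (pvRunA board dx 0 n.toNat (x, y)).1 = '.'
          ∨ pvRunA board dx 0 n.toNat (x, y) = (x, y))) := by
  have hL : 0 < pvRowLenA board y := by omega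
  have hrun := pvRunA_H board dx y hy0 hyh hL n.toNat x
  rcases hdotOr with hdot | ⟨hnd', hx', hy', hrow0⟩
  · have hns : ∃ t : Int, 0 ≤ t ∧ t < pvRowLenA board (y.toNat : Int)
        ∧ pvCellA board (y.toNat : Int) t ≠ ' ' := by
      have hyy : ((y.toNat : Nat) : Int) = y := by omega
      rw [hyy]
      exact ⟨x, hx0, hxL, by rw [hdot]; decide⟩
    have pk := pvRowsOK board y.toNat (by omega) hns
    have hyy : ((y.toNat : Nat) : Int) = y := by omega
    rw [hyy] at pk
    have hmem : x ∈ (pvRowsB board).getD y.toNat [] :=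
      (pk.2.2.2 x).2 ⟨hx0, hxL, by show pvCellA board y x ≠ ' '; rw [hdot]; decide⟩
    constructor
    · rw [hrun, pvMoveB_eq _ _ _ dx pk hdx x hdot hmem n hn]
    · rw [hrun]
      have hres := pvLineA_res (fun t => pvCellA board y t) (pvRowLenA board y) dx hL n.toNat x
        hx0 hxL
      refine ⟨hres.1, hres.2.1, rfl, ?_⟩
      rcases hres.2.2 with he | hd'
      · rw [he]
        exact Or.inl hdot
      · exact Or.inl hd'
  · subst hx' hy'
    obtain ⟨hbne, hL0, hns0⟩ := pvRow0OK_facts board hrow0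
    have pk := pvRowsOK board 0 (by simpa using List.length_pos_iff.2 hbne)
      (by simpa using hns0)
    constructor
    · rw [pvRunA_noDot board hnd' dx 0 n.toNat (0, 0)]
      rw [pvMoveB_noDot _ _ dx (by simpa using pk.2.2.1)
        (fun t => pvCellA_ne_dot board hnd' 0 t) 0 n]
    · rw [pvRunA_noDot board hnd' dx 0 n.toNat (0, 0)]
      exact ⟨hx0, hxL, rfl, Or.inr rfl⟩

-- ---------- per-move equivalence, vertical (needs rectangularity) ----------

theorem pvMoveCase_V (board : List String)
    (hrect : ∀ r ∈ board, r.toList.length = (board.headD "").toList.length)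
    (hw : 0 < (board.headD "").toList.length)
    (dy : Int) (hdy : dy = 1 ∨ dy = -1) (x y n : Int)
    (hx0 : 0 ≤ x) (hxW : x < pvW board) (hy0 : 0 ≤ y) (hyh : y < (board.length : Int))
    (hdotOr : pvCellA board y x = '.' ∨ (pvNoDot board ∧ x = 0 ∧ y = 0 ∧ pvCol0OK board))
    (hn : 0 ≤ n) :
    pvRunA board 0 dy n.toNat (x, y)
      = (x, pvMoveB (fun c => pvCellA board c x) ((pvColsB board (pvW board)).getD x.toNat []) dy y n)
    ∧ ((pvRunA board 0 dy n.toNat (x, y)).1 = x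
       ∧ 0 ≤ (pvRunA board 0 dy n.toNat (x, y)).2
       ∧ (pvRunA board 0 dy n.toNat (x, y)).2 < (board.length : Int)
       ∧ (pvCellA board (pvRunA board 0 dy n.toNat (x, y)).2 x = '.'
          ∨ pvRunA board 0 dy n.toNat (x, y) = (x, y))) := by
  have hb0 : (0 : Int) < (board.length : Int) := by omega
  have hxall : ∀ y' : Int, 0 ≤ y' → y' < (board.length : Int) → x < pvRowLenA board y' := by
    intro y' h0 h1
    rw [pvRowLenA_eq_W board hrect y' h0 (by omega)]
    exact hxW
  have hrun := pvRunA_V board dy x hx0 hxall n.toNat y hy0 hyh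
  have hxn : x.toNat < (board.headD "").toList.length := by
    rw [pvW_def] at hxW
    omega
  rcases hdotOr with hdot | ⟨hnd, hx, hy, hcol0⟩
  · have hns : ∃ t : Int, 0 ≤ t ∧ t < (board.length : Int)
        ∧ pvCellA board t ((x.toNat : Nat) : Int) ≠ ' ' := by
      have hxx : ((x.toNat : Nat) : Int) = x := by omega
      rw [hxx]
      exact ⟨y, hy0, hyh, by rw [hdot]; decide⟩
    have pk := pvColsOK board hrect hw x.toNat hxn hns
    have hxx : ((x.toNat : Nat) : Int) = x := by omega
    rw [hxx] at pk
    have hmem : y ∈ (pvColsB board (pvW board)).getD x.toNat [] :=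
      (pk.2.2.2 y).2 ⟨hy0, hyh, by show pvCellA board y x ≠ ' '; rw [hdot]; decide⟩
    constructor
    · rw [hrun, pvMoveB_eq _ _ _ dy pk hdy y hdot hmem n hn]
    · rw [hrun]
      have hres := pvLineA_res (fun t => pvCellA board t x) ((board.length : Int)) dy hb0
        n.toNat y hy0 hyh
      refine ⟨rfl, hres.1, hres.2.1, ?_⟩
      rcases hres.2.2 with he | hd'
      · rw [he]
        exact Or.inl hdot
      · exact Or.inl hd'
  · subst hx hy
    have hns := pvCol0OK_facts board hcol0
    have pk := pvColsOK board hrect hw 0 hw (by simpa using hns)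
    constructor
    · rw [pvRunA_noDot board hnd 0 dy n.toNat (0, 0)]
      rw [pvMoveB_noDot _ _ dy (by simpa using pk.2.2.1)
        (fun t => pvCellA_ne_dot board hnd t 0) 0 n]
    · rw [pvRunA_noDot board hnd 0 dy n.toNat (0, 0)]
      exact ⟨rfl, hy0, hyh, Or.inr rfl⟩

-- ---------- the two fold bodies (named copies of the ports' lambdas) ----------

def pvFA (board : List String) : (Int × (Int × Int)) → String → (Int × (Int × Int)) :=
  fun st p =>
    if PySem.Str.strIsdigit p then
      let mv := (PySem.List.pyGet? pvMovesA st.1).getD (0, 0)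
      (st.1, pvRunA board mv.1 mv.2 ((PySem.Int.ofStr? p).getD 0).toNat st.2)
    else if p = "L" then (PySem.Int.mod (st.1 - 1) 4, st.2)
    else (PySem.Int.mod (st.1 + 1) 4, st.2)

def pvFB (board : List String) : (Int × (Int × Int)) → String → (Int × (Int × Int)) :=
  fun st p =>
    if PySem.Str.strIsdigit p then
      let n := (PySem.Int.ofStr? p).getD 0
      if 0 < n then
        if PySem.Int.mod st.1 2 = 0 then
          let stp : Int := if st.1 = 0 then 1 else -1
          (st.1, (pvMoveB (fun c => pvCellB board st.2.2 c)
            ((pvRowsB board).getD st.2.2.toNat []) stp st.2.1 n, st.2.2))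
        else
          let stp : Int := if st.1 = 1 then 1 else -1
          (st.1, (st.2.1, pvMoveB (fun c => pvCellB board c st.2.1)
            ((pvColsB board (PySem.List.maxD (board.map PySem.Str.len) (fun v => v) 0)).getD
              st.2.1.toNat []) stp st.2.2 n))
      else st
    else if p = "L" then (PySem.Int.mod (st.1 - 1) 4, st.2)
    else (PySem.Int.mod (st.1 + 1) 4, st.2)

-- shift/head lemmas for the token-parity predicate
theorem pvTokAt_head (b c : Nat) (p : String) (rest : List String)
    (hp : pvNum1 p) (hc : c % 2 = b) : pvTokAt b c (p :: rest) := by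
  refine ⟨0, by simp, by rw [List.getD_cons_zero]; exact hp, ?_⟩
  simp [pvCntNN]
  exact hc

theorem pvTokAt_cons_digit (b c : Nat) (p : String) (rest : List String)
    (hd : PySem.Str.strIsdigit p = true) :
    pvTokAt b c rest → pvTokAt b c (p :: rest) := by
  rintro ⟨i, hi, hnum, hpar⟩
  rw [List.mem_range] at hi
  refine ⟨i + 1, by simp; omega, by rw [List.getD_cons_succ]; exact hnum, ?_⟩
  have : pvCntNN (List.take (i + 1) (p :: rest)) = pvCntNN (List.take i rest) := by
    rw [List.take_succ_cons]
    unfold pvCntNN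
    rw [List.countP_cons, hd]
    simp
  rw [this]
  exact hpar

theorem pvTokAt_cons_nondigit (b c : Nat) (p : String) (rest : List String)
    (hd : PySem.Str.strIsdigit p = false) :
    pvTokAt b (c + 1) rest → pvTokAt b c (p :: rest) := by
  rintro ⟨i, hi, hnum, hpar⟩
  rw [List.mem_range] at hi
  refine ⟨i + 1, by simp; omega, by rw [List.getD_cons_succ]; exact hnum, ?_⟩
  have : pvCntNN (List.take (i + 1) (p :: rest)) = pvCntNN (List.take i rest) + 1 := by
    rw [List.take_succ_cons]
    unfold pvCntNN
    rw [List.countP_cons, hd]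
    simp
  rw [this]
  omega

-- any effective move token is executed at an even or an odd facing
theorem pvEffSplit (path : List String) (h : ∃ p ∈ path, pvNum1 p) :
    pvTokAt 0 0 path ∨ pvTokAt 1 0 path := by
  obtain ⟨p, hp, hnum⟩ := h
  obtain ⟨i, hi, rfl⟩ := List.mem_iff_getElem.1 hp
  have hg : path.getD i "" = path[i] := List.getD_eq_getElem path "" hi
  rcases Nat.even_or_odd (0 + pvCntNN (path.take i)) with he | ho
  · left
    refine ⟨i, List.mem_range.2 hi, by rw [hg]; exact hnum, ?_⟩
    obtain ⟨m, hm⟩ := he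
    omega
  · right
    refine ⟨i, List.mem_range.2 hi, by rw [hg]; exact hnum, ?_⟩
    obtain ⟨m, hm⟩ := ho
    omega

-- ---------- one fold step: the two bodies agree and preserve the invariant ----------

theorem pvStepTok (board : List String) (st : Int × (Int × Int)) (p : String)
    (hst : pvInv board st)
    (hVhead : pvNum1 p → st.1 % 2 = 1 →
      (∀ r ∈ board, r.toList.length = (board.headD "").toList.length) ∧
      0 < (board.headD "").toList.length)
    (hHhead : pvNoDot board → pvNum1 p → st.1 % 2 = 0 → pvRow0OK board)
    (hChead : pvNoDot board → pvNum1 p → st.1 % 2 = 1 → pvCol0OK board) :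
    pvFA board st p = pvFB board st p ∧ pvInv board (pvFA board st p) ∧
      (PySem.Str.strIsdigit p = true → (pvFA board st p).1 = st.1) ∧
      (PySem.Str.strIsdigit p = false →
        (pvFA board st p).1 = PySem.Int.mod (st.1 - 1) 4
        ∨ (pvFA board st p).1 = PySem.Int.mod (st.1 + 1) 4) := by
  obtain ⟨f, x, y⟩ := st
  obtain ⟨⟨hm0, hm4⟩, ⟨hx0, hxL⟩, ⟨hy0, hyh⟩, hdotOr⟩ := hst
  dsimp only at hm0 hm4 hx0 hxL hy0 hyh hdotOr
  have hmain : pvFA board (f, x, y) p = pvFB board (f, x, y) p ∧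
      pvInv board (pvFA board (f, x, y) p) := by
   unfold pvFA pvFB
   dsimp only
   by_cases hdig : PySem.Str.strIsdigit p
   · simp only [hdig, if_true]
     by_cases hpos : 0 < (PySem.Int.ofStr? p).getD 0
     · simp only [if_pos hpos]
       set n := (PySem.Int.ofStr? p).getD 0 with hndef
       have hnum : pvNum1 p := ⟨hdig, by omega⟩
       have hf4 : f = 0 ∨ f = 1 ∨ f = 2 ∨ f = 3 := by omega
       rcases hf4 with rfl | rfl | rfl | rfl
       · -- f = 0 : move right (horizontal)
         rw [show ((PySem.List.pyGet? pvMovesA (0 : Int)).getD ((0 : Int), (0 : Int)))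
             = ((1 : Int), (0 : Int)) from rfl]
         dsimp only
         rw [pvCellB_eq_cellA]
         have hdotOr' : pvCellA board y x = '.' ∨ (pvNoDot board ∧ x = 0 ∧ y = 0 ∧ pvRow0OK board) := by
           rcases hdotOr with h | ⟨h1, h2, h3⟩
           · exact Or.inl h
           · exact Or.inr ⟨h1, h2, h3, hHhead h1 hnum (by show (0 : Int) % 2 = 0; decide)⟩
         have hmc := pvMoveCase_H board 1 (Or.inl rfl) x y n hx0 hxL hy0 hyh hdotOr'
           (le_of_lt hpos)
         refine ⟨by rw [hmc.1]; rfl, ?_⟩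
         unfold pvInv
         dsimp only
         refine ⟨⟨by omega, by omega⟩, ⟨hmc.2.1, ?_⟩, ⟨?_, ?_⟩, ?_⟩
         · rw [hmc.2.2.2.1]; exact hmc.2.2.1
         · rw [hmc.2.2.2.1]; omega
         · rw [hmc.2.2.2.1]; omega
         · rcases hmc.2.2.2.2 with hc | he
           · rw [hmc.2.2.2.1]; exact Or.inl hc
           · rw [he]; exact hdotOr
       · -- f = 1 : move down (vertical)
         rw [show ((PySem.List.pyGet? pvMovesA (1 : Int)).getD ((0 : Int), (0 : Int)))
             = ((0 : Int), (1 : Int)) from rfl]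
         dsimp only
         rw [pvCellB_eq_cellA]
         obtain ⟨hrect, hw⟩ := hVhead hnum (by show (1 : Int) % 2 = 1; decide)
         have hbne : board ≠ [] := by
           intro h
           rw [h] at hw
           simp at hw
         rw [pvMaxD_W board hbne hrect]
         have hxW : x < pvW board := by
           rw [← pvRowLenA_eq_W board hrect y hy0 (by omega)]
           exact hxL
         have hdotOr' : pvCellA board y x = '.' ∨ (pvNoDot board ∧ x = 0 ∧ y = 0 ∧ pvCol0OK board) := by
           rcases hdotOr with h | ⟨h1, h2, h3⟩
           · exact Or.inl h
           · exact Or.inr ⟨h1, h2, h3, hChead h1 hnum (by show (1 : Int) % 2 = 1; decide)⟩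
         have hmc := pvMoveCase_V board hrect hw 1 (Or.inl rfl) x y n hx0 hxW hy0 hyh hdotOr'
           (le_of_lt hpos)
         refine ⟨by rw [hmc.1]; rfl, ?_⟩
         unfold pvInv
         dsimp only
         refine ⟨⟨by omega, by omega⟩, ⟨?_, ?_⟩, ⟨hmc.2.2.1, hmc.2.2.2.1⟩, ?_⟩
         · rw [hmc.2.1]; omega
         · have h1 := hmc.2.2.1
           have h2 := hmc.2.2.2.1
           have heqW := pvRowLenA_eq_W board hrect _ h1 (by omega)
           rw [hmc.2.1, heqW]
           exact hxW
         · rcases hmc.2.2.2.2 with hc | he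
           · rw [hmc.2.1]; exact Or.inl hc
           · rw [he]; exact hdotOr
       · -- f = 2 : move left (horizontal)
         rw [show ((PySem.List.pyGet? pvMovesA (2 : Int)).getD ((0 : Int), (0 : Int)))
             = ((-1 : Int), (0 : Int)) from rfl]
         dsimp only
         rw [pvCellB_eq_cellA]
         have hdotOr' : pvCellA board y x = '.' ∨ (pvNoDot board ∧ x = 0 ∧ y = 0 ∧ pvRow0OK board) := by
           rcases hdotOr with h | ⟨h1, h2, h3⟩
           · exact Or.inl h
           · exact Or.inr ⟨h1, h2, h3, hHhead h1 hnum (by show (2 : Int) % 2 = 0; decide)⟩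
         have hmc := pvMoveCase_H board (-1) (Or.inr rfl) x y n hx0 hxL hy0 hyh hdotOr'
           (le_of_lt hpos)
         refine ⟨by rw [hmc.1]; rfl, ?_⟩
         unfold pvInv
         dsimp only
         refine ⟨⟨by omega, by omega⟩, ⟨hmc.2.1, ?_⟩, ⟨?_, ?_⟩, ?_⟩
         · rw [hmc.2.2.2.1]; exact hmc.2.2.1
         · rw [hmc.2.2.2.1]; omega
         · rw [hmc.2.2.2.1]; omega
         · rcases hmc.2.2.2.2 with hc | he
           · rw [hmc.2.2.2.1]; exact Or.inl hc
           · rw [he]; exact hdotOr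
       · -- f = 3 : move up (vertical)
         rw [show ((PySem.List.pyGet? pvMovesA (3 : Int)).getD ((0 : Int), (0 : Int)))
             = ((0 : Int), (-1 : Int)) from rfl]
         dsimp only
         rw [pvCellB_eq_cellA]
         obtain ⟨hrect, hw⟩ := hVhead hnum (by show (3 : Int) % 2 = 1; decide)
         have hbne : board ≠ [] := by
           intro h
           rw [h] at hw
           simp at hw
         rw [pvMaxD_W board hbne hrect]
         have hxW : x < pvW board := by
           rw [← pvRowLenA_eq_W board hrect y hy0 (by omega)]
           exact hxL
         have hdotOr' : pvCellA board y x = '.' ∨ (pvNoDot board ∧ x = 0 ∧ y = 0 ∧ pvCol0OK board) := by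
           rcases hdotOr with h | ⟨h1, h2, h3⟩
           · exact Or.inl h
           · exact Or.inr ⟨h1, h2, h3, hChead h1 hnum (by show (3 : Int) % 2 = 1; decide)⟩
         have hmc := pvMoveCase_V board hrect hw (-1) (Or.inr rfl) x y n hx0 hxW hy0 hyh hdotOr'
           (le_of_lt hpos)
         refine ⟨by rw [hmc.1]; rfl, ?_⟩
         unfold pvInv
         dsimp only
         refine ⟨⟨by omega, by omega⟩, ⟨?_, ?_⟩, ⟨hmc.2.2.1, hmc.2.2.2.1⟩, ?_⟩
         · rw [hmc.2.1]; omega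
         · have h1 := hmc.2.2.1
           have h2 := hmc.2.2.2.1
           have heqW := pvRowLenA_eq_W board hrect _ h1 (by omega)
           rw [hmc.2.1, heqW]
           exact hxW
         · rcases hmc.2.2.2.2 with hc | he
           · rw [hmc.2.1]; exact Or.inl hc
           · rw [he]; exact hdotOr
     · simp only [if_neg hpos]
       have hz : ((PySem.Int.ofStr? p).getD 0).toNat = 0 := by omega
       rw [hz]
       exact ⟨rfl, ⟨⟨hm0, hm4⟩, ⟨hx0, hxL⟩, ⟨hy0, hyh⟩, hdotOr⟩⟩
   · simp only [hdig, Bool.false_eq_true, if_false]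
     have h4 : (0 : Int) < 4 := by norm_num
     have hdig' : PySem.Str.strIsdigit p = false := by
       cases h : PySem.Str.strIsdigit p
       · rfl
       · exact absurd h hdig
     by_cases hLp : p = "L"
     · simp only [hLp]
       exact ⟨by trivial, ⟨⟨PySem.Int.mod_nonneg _ h4, PySem.Int.mod_lt _ h4⟩, ⟨hx0, hxL⟩,
         ⟨hy0, hyh⟩, hdotOr⟩⟩
     · simp only [if_neg hLp]
       exact ⟨by trivial, ⟨⟨PySem.Int.mod_nonneg _ h4, PySem.Int.mod_lt _ h4⟩, ⟨hx0, hxL⟩,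
         ⟨hy0, hyh⟩, hdotOr⟩⟩


  refine ⟨hmain.1, hmain.2, ?_, ?_⟩
  · intro hd
    unfold pvFA
    dsimp only
    rw [if_pos hd]
  · intro hd
    unfold pvFA
    dsimp only
    rw [if_neg (by rw [hd]; exact Bool.false_ne_true)]
    by_cases hL : p = "L"
    · rw [if_pos hL]
      exact Or.inl rfl
    · rw [if_neg hL]
      exact Or.inr rfl

-- ---------- the whole path fold ----------

theorem pvFoldEq (board : List String) :
    ∀ (path : List String) (c : Nat) (st : Int × (Int × Int)),
      pvInv board st → st.1 % 2 = ((c % 2 : Nat) : Int) →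
      (pvTokAt 1 c path →
        (∀ r ∈ board, r.toList.length = (board.headD "").toList.length) ∧
        0 < (board.headD "").toList.length) →
      (pvNoDot board → pvTokAt 0 c path → pvRow0OK board) →
      (pvNoDot board → pvTokAt 1 c path → pvCol0OK board) →
      path.foldl (pvFA board) st = path.foldl (pvFB board) st := by
  intro path
  induction path with
  | nil => intro c st _ _ _ _ _; rfl
  | cons p rest ih =>
    intro c st hst hpar hV hH hC
    have hcodd : st.1 % 2 = 1 → c % 2 = 1 := by omega
    have hceven : st.1 % 2 = 0 → c % 2 = 0 := by omega
    have hstep := pvStepTok board st p hst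
      (fun hnum hodd => hV (pvTokAt_head 1 c p rest hnum (hcodd hodd)))
      (fun hnd hnum heven => hH hnd (pvTokAt_head 0 c p rest hnum (hceven heven)))
      (fun hnd hnum hodd => hC hnd (pvTokAt_head 1 c p rest hnum (hcodd hodd)))
    simp only [List.foldl_cons]
    rw [← hstep.1]
    by_cases hdig : PySem.Str.strIsdigit p = true
    · refine ih c (pvFA board st p) hstep.2.1 ?_ ?_ ?_ ?_
      · rw [hstep.2.2.1 hdig]; exact hpar
      · exact fun h => hV (pvTokAt_cons_digit 1 c p rest hdig h)
      · exact fun hnd h => hH hnd (pvTokAt_cons_digit 0 c p rest hdig h)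
      · exact fun hnd h => hC hnd (pvTokAt_cons_digit 1 c p rest hdig h)
    · have hdig' : PySem.Str.strIsdigit p = false := by
        cases h : PySem.Str.strIsdigit p
        · rfl
        · exact absurd h hdig
      refine ih (c + 1) (pvFA board st p) hstep.2.1 ?_ ?_ ?_ ?_
      · have hb := hstep.2.1.1
        have hm := hstep.2.2.2 hdig'
        have h1 := hst.1
        rcases hm with hm | hm <;>
          · rw [hm, PySem.Int.mod_eq_emod_of_pos (by norm_num : (0:Int) < 4)]
            omega
      · exact fun h => hV (pvTokAt_cons_nondigit 1 c p rest hdig' h)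
      · exact fun hnd h => hH hnd (pvTokAt_cons_nondigit 0 c p rest hdig' h)
      · exact fun hnd h => hC hnd (pvTokAt_cons_nondigit 1 c p rest hdig' h)

theorem part1_spec : Claim_equal_part1 := by
  unfold Claim_equal_part1
  intro data _hdom hpre
  unfold Spec_part1
  obtain ⟨board, path⟩ := data
  unfold Pre_part1 at hpre
  dsimp only at hpre
  show part1 (board, path) = part1_alt (board, path)
  have hA : part1 (board, path)
      = (let res := path.foldl (pvFA board) (0, pvStartA board 0);
         1000 * (res.2.2 + 1) + 4 * (res.2.1 + 1) + res.1) := rfl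
  have hB : part1_alt (board, path)
      = (let res := path.foldl (pvFB board) (0, pvStartB board);
         1000 * (res.2.2 + 1) + 4 * (res.2.1 + 1) + res.1) := rfl
  rw [hA, hB, pvStartB_eq]
  by_cases heff : ∃ p ∈ path, pvNum1 p
  · obtain ⟨hV, hRC⟩ := hpre heff
    have hInv0 : pvInv board (0, pvStartA board 0) := by
      rcases pvStartA_spec board 0 with ⟨k, hk, j, hj, heq, hch⟩ | ⟨hnd, heq⟩
      · rw [heq]
        have h0k : (0 : Int) + (k : Int) = (k : Int) := by omega
        rw [h0k]
        have hrl : pvRowLenA board (k : Int) = ((board[k]).toList.length : Int) := by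
          have := pvRowLenA_eq board (k : Int) (by omega) (by simpa using hk)
          simpa using this
        have hcell : pvCellA board (k : Int) ((j : Int)) = (board[k]).toList[j] := by
          have := pvCellA_eq_getElem board (k : Int) ((j : Int)) (by omega)
            (by simpa using hk) (by omega) (by simpa using hj)
          simpa using this
        unfold pvInv
        dsimp only
        refine ⟨⟨by omega, by omega⟩, ⟨by omega, by rw [hrl]; omega⟩, ⟨by omega, by omega⟩,
          Or.inl (by rw [hcell]; exact hch)⟩
      · rw [heq]
        have hlen0 : (0 : Int) < (board.length : Int) ∧ 0 < pvRowLenA board 0 := by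
          rcases pvEffSplit path heff with hHz | hVz
          · have hrow0 := (hRC hnd).1 hHz
            obtain ⟨hbne, hL0, _⟩ := pvRow0OK_facts board hrow0
            have := List.length_pos_iff.2 hbne
            exact ⟨by omega, hL0⟩
          · obtain ⟨hrect, hw⟩ := hV hVz
            have hbne : board ≠ [] := by
              intro h
              rw [h] at hw
              simp at hw
            have hb := List.length_pos_iff.2 hbne
            refine ⟨by omega, ?_⟩
            rw [pvRowLenA_eq_W board hrect 0 le_rfl (by simpa using hb)]
            rw [pvW_def]
            omega
        unfold pvInv
        dsimp only
        exact ⟨⟨by omega, by omega⟩, ⟨by omega, hlen0.2⟩, ⟨by omega, hlen0.1⟩,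
          Or.inr ⟨hnd, rfl, rfl⟩⟩
    rw [pvFoldEq board path 0 (0, pvStartA board 0) hInv0 (by norm_num) hV
      (fun hnd h => (hRC hnd).1 h) (fun hnd h => (hRC hnd).2 h)]
  · have hcong : ∀ p ∈ path, ∀ st : Int × (Int × Int), pvFA board st p = pvFB board st p := by
      intro p hp st
      unfold pvFA pvFB
      dsimp only
      by_cases hdig : PySem.Str.strIsdigit p
      · have hn : ¬ (0 < (PySem.Int.ofStr? p).getD 0) := by
          intro hlt
          exact heff ⟨p, hp, hdig, by omega⟩
        simp only [hdig, if_true, if_neg hn]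
        have hz : ((PySem.Int.ofStr? p).getD 0).toNat = 0 := by omega
        rw [hz]
        show (st.1, st.2) = st
        exact Prod.mk.eta
      · simp only [hdig, if_false, Bool.false_eq_true]
    rw [PySem.List.foldl_congr_mem' path (pvFA board) (pvFB board) _
      (fun p hp acc => hcong p hp acc)]
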